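-- pv_equiv track=rewrite | github.com/pp8817/Algorithm | 백준/Gold/2146. 다리 만들기/다리 만들기.py | label_islands
-- ===== SOURCE A (Python) =====
-- from collections import deque
--
-- d = [(-1,0), (1,0), (0,-1), (0,1)]
--
-- def label_islands(maps, N):
--     visited = [[False]*N for _ in range(N)]
--     island_id = 2
--
--     for i in range(N):
--         for j in range(N):
--             if maps[i][j] == 1 and not visited[i][j]:
--                 q = deque([(i, j)])
--                 visited[i][j] = True
--                 maps[i][j] = island_id
--
--                 while q:
--                     x, y = q.popleft()
--                     for dx, dy in d:
--                         nx, ny = x + dx, y + dy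
--                         if 0 <= nx < N and 0 <= ny < N:
--                             if maps[nx][ny] == 1 and not visited[nx][ny]:
--                                 visited[nx][ny] = True
--                                 maps[nx][ny] = island_id
--                                 q.append((nx, ny))
--
--                 island_id += 1
--     return maps, island_id - 1
-- ===== SOURCE B (Python) =====
-- def label_islands(maps, N):
--     # Union-find over flattened indices i*N+j; returns the same (maps, last_id) as A.
--     # Like A, mutates maps in place (relabels land cells).
--     parent = list(range(N * N)) if N > 0 else []
--
--     def find(k):
--         while parent[k] != k:
--             k = parent[k]
--         return k
--
--     # pass 1: unite each land cell with its up and left land neighbours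
--     for i in range(N):
--         for j in range(N):
--             if maps[i][j] == 1:
--                 for pi, pj in ((i - 1, j), (i, j - 1)):
--                     if pi >= 0 and pj >= 0 and maps[pi][pj] == 1:
--                         ra = find(pi * N + pj)
--                         rb = find(i * N + j)
--                         if ra != rb:
--                             if ra < rb:
--                                 parent[rb] = ra
--                             else:
--                                 parent[ra] = rb
--
--     # pass 2: the root of a component is its first row-major cell;
--     # the first time a root is seen it receives the next label (from 2 up)
--     next_id = 2
--     labels = {}
--     for i in range(N):
--         for j in range(N):
--             if maps[i][j] == 1:
--                 r = find(i * N + j)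
--                 if r not in labels:
--                     labels[r] = next_id
--                     next_id += 1
--                 maps[i][j] = labels[r]
--     return maps, next_id - 1
-- ===== Notes on version B (the rewrite author's own statement) =====
-- stated objective: alternative
-- what changed: Replaces the per-seed BFS flood fill (queue + visited matrix) by a disjoint-set union over flattened indices: one row-major pass unites each land cell with its up/left land neighbours (always pointing the larger root at the smaller, so each component's root is its first row-major cell), and a second pass assigns labels 2,3,... the first time each root is seen.
import Mathlib
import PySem

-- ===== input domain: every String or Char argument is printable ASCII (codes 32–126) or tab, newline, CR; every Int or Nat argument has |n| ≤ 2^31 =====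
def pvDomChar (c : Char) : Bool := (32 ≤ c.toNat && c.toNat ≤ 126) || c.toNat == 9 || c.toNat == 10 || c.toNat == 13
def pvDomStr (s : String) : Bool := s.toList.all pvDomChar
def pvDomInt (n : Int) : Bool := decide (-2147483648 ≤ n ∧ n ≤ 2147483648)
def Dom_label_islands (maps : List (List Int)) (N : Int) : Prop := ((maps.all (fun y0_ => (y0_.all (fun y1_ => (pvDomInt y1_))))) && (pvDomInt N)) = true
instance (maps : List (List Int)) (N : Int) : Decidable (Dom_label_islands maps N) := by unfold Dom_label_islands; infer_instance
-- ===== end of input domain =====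

-- B replaces A's per-seed BFS flood fill (queue + visited matrix) by a two-pass disjoint-set
-- union over flattened cell indices; equal return value, and like A it relabels `maps` in place.

-- ===== PORT A =====
-- maps[i][j] (defaults unreachable under Pre_)
def pvGetCell (m : List (List Int)) (i j : Nat) : Int := (m.getD i []).getD j 0
-- maps[i][j] = v
def pvSetCell (m : List (List Int)) (i j : Nat) (v : Int) : List (List Int) :=
  m.modify i (fun r => r.set j v)
-- visited[i][j]; the default `true` is returned only on accesses A never performs
def pvGetVis (v : List (List Bool)) (i j : Nat) : Bool := (v.getD i []).getD j true
-- visited[i][j] = True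
def pvSetVis (v : List (List Bool)) (i j : Nat) : List (List Bool) :=
  v.modify i (fun r => r.set j true)
-- d = [(-1,0), (1,0), (0,-1), (0,1)]
def pvDirs : List (Int × Int) := [(-1,0), (1,0), (0,-1), (0,1)]
-- termination measure for the BFS while-loop: number of False entries in visited
def pvCountFalse (v : List (List Bool)) : Nat := (v.map (fun r => r.count false)).sum

-- one neighbour check of A's inner `for dx, dy in d` loop
def pvBfsNb (N id x y : Int) (s : List (List Int) × List (List Bool) × List (Int × Int))
    (dxy : Int × Int) : List (List Int) × List (List Bool) × List (Int × Int) :=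
  if 0 ≤ x + dxy.1 ∧ x + dxy.1 < N ∧ 0 ≤ y + dxy.2 ∧ y + dxy.2 < N then
    if pvGetCell s.1 (x + dxy.1).toNat (y + dxy.2).toNat = 1 ∧
       pvGetVis s.2.1 (x + dxy.1).toNat (y + dxy.2).toNat = false then
      (pvSetCell s.1 (x + dxy.1).toNat (y + dxy.2).toNat id,
       pvSetVis s.2.1 (x + dxy.1).toNat (y + dxy.2).toNat,
       s.2.2 ++ [(x + dxy.1, y + dxy.2)])
    else s
  else s

-- the `while q:` loop; fuel = (#False entries of visited) + |q| never runs out: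
-- each iteration removes one queue entry and each append flips one visited entry to True
def pvBfs (N id : Int) : Nat → List (List Int) → List (List Bool) → List (Int × Int) →
    List (List Int) × List (List Bool)
  | _, m, v, [] => (m, v)
  | 0, m, v, _ => (m, v)  -- dead branch: fuel is always ≥ the measure, see pvBfs_fuel_irrel
  | fuel + 1, m, v, (x, y) :: q' =>
    let s := pvDirs.foldl (pvBfsNb N id x y) (m, v, q')
    pvBfs N id fuel s.1 s.2.1 s.2.2

-- body of the double `for i / for j` loop
def pvStepCell (N : Int) (st : List (List Int) × List (List Bool) × Int) (i j : Int) :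
    List (List Int) × List (List Bool) × Int :=
  if pvGetCell st.1 i.toNat j.toNat = 1 ∧ pvGetVis st.2.1 i.toNat j.toNat = false then
    let v1 := pvSetVis st.2.1 i.toNat j.toNat
    let m1 := pvSetCell st.1 i.toNat j.toNat st.2.2
    let r := pvBfs N st.2.2 (pvCountFalse v1 + 1) m1 v1 [(i, j)]
    (r.1, r.2, st.2.2 + 1)
  else st

def label_islands (maps : List (List Int)) (N : Int) : List (List Int) × Int :=
  let visited := List.replicate N.toNat (List.replicate N.toNat false)
  let st := (PySem.List.pyRange 0 N 1).foldl
    (fun st i => (PySem.List.pyRange 0 N 1).foldl (fun st' j => pvStepCell N st' i j) st)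
    (maps, visited, 2)
  (st.1, st.2.2 - 1)

-- ===== PORT B =====
-- `while parent[k] != k: k = parent[k]`; parent entries always point to a strictly
-- smaller index, so fuel k+1 always suffices (proved and used via the invariant below)
def pvUfFind (parent : List Int) : Nat → Nat → Nat
  | 0, k => k
  | fuel+1, k =>
    if parent.getD k (Int.ofNat k) ≠ Int.ofNat k then
      pvUfFind parent fuel (parent.getD k (Int.ofNat k)).toNat
    else k

def pvUfRoot (parent : List Int) (k : Nat) : Nat := pvUfFind parent (k + 1) k

-- body of pass 1: unite a land cell with its up and left land neighbours
def pvUnite (N : Int) (maps : List (List Int)) (parent : List Int) (i j : Int) : List Int :=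
  if pvGetCell maps i.toNat j.toNat = 1 then
    [(i-1, j), (i, j-1)].foldl (fun par pij =>
      if 0 ≤ pij.1 ∧ 0 ≤ pij.2 ∧ pvGetCell maps pij.1.toNat pij.2.toNat = 1 then
        let ra := pvUfRoot par (pij.1.toNat * N.toNat + pij.2.toNat)
        let rb := pvUfRoot par (i.toNat * N.toNat + j.toNat)
        if ra ≠ rb then
          if ra < rb then par.set rb (Int.ofNat ra) else par.set ra (Int.ofNat rb)
        else par
      else par) parent
  else parent

-- body of pass 2: label each land cell by its root's label, handing out 2,3,… on first sight
def pvLabelCell (N : Int) (parent : List Int)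
    (st : List (List Int) × PySem.Dict Int Int × Int) (i j : Int) :
    List (List Int) × PySem.Dict Int Int × Int :=
  if pvGetCell st.1 i.toNat j.toNat = 1 then
    let r : Int := Int.ofNat (pvUfRoot parent (i.toNat * N.toNat + j.toNat))
    let ln : PySem.Dict Int Int × Int :=
      if (st.2.1.get? r).isNone then (st.2.1.insert r st.2.2, st.2.2 + 1) else (st.2.1, st.2.2)
    (pvSetCell st.1 i.toNat j.toNat (ln.1.getD r 0), ln.1, ln.2)
  else st

def label_islands_alt (maps : List (List Int)) (N : Int) : List (List Int) × Int :=
  let parent0 : List Int := if 0 < N then (List.range (N.toNat * N.toNat)).map Int.ofNat else []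
  let parent := (PySem.List.pyRange 0 N 1).foldl
    (fun par i => (PySem.List.pyRange 0 N 1).foldl (fun par' j => pvUnite N maps par' i j) par)
    parent0
  let st := (PySem.List.pyRange 0 N 1).foldl
    (fun st i => (PySem.List.pyRange 0 N 1).foldl (fun st' j => pvLabelCell N parent st' i j) st)
    (maps, PySem.Dict.empty, 2)
  (st.1, st.2.2 - 1)

-- ===== PRECONDITION & SPEC =====
-- exactly the inputs on which A returns: every cell maps[i][j], 0 ≤ i,j < N, must exist
-- (otherwise A raises IndexError)
def Pre_label_islands (maps : List (List Int)) (N : Int) : Prop :=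
  N ≤ (maps.length : Int) ∧ ∀ r ∈ maps.take N.toNat, N ≤ (r.length : Int)
instance (maps : List (List Int)) (N : Int) : Decidable (Pre_label_islands maps N) := by
  unfold Pre_label_islands; infer_instance

def pvWitness_label_islands : List (List Int) × Int := ([[1, 0], [1, 1]], 2)

def Spec_label_islands (maps : List (List Int)) (N : Int) (out : List (List Int) × Int) : Prop :=
  out = label_islands_alt maps N
instance (maps : List (List Int)) (N : Int) (out : List (List Int) × Int) :
    Decidable (Spec_label_islands maps N out) := by unfold Spec_label_islands; infer_instance

-- ===== CLAIM (what is proved, stated in full; the proofs are below) =====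
def Claim_equal_label_islands : Prop := ∀ (maps : List (List Int)) (N : Int),
  Dom_label_islands maps N → Pre_label_islands maps N →
  Spec_label_islands maps N (label_islands maps N)

-- ===== LEMMAS AND PROOFS =====

theorem pvCountFalse_setVis (v : List (List Bool)) (i j : Nat)
    (h : pvGetVis v i j = false) : pvCountFalse (pvSetVis v i j) + 1 = pvCountFalse v := by
  induction v generalizing i with
  | nil => simp [pvGetVis] at h
  | cons r rest ih =>
    cases i with
    | zero =>
      simp [pvGetVis] at h
      have hj : j < r.length := by
        by_contra hj
        simp [List.getD_eq_getElem?_getD, List.getElem?_eq_none (by omega : r.length ≤ j)] at h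
      have hrj : r[j] = false := by
        simpa [List.getD_eq_getElem?_getD, List.getElem?_eq_getElem hj] using h
      have hcount : r.count false = (r.set j true).count false + 1 := by
        have := List.count_set (a := true) (b := false) (l := r) (i := j) hj
        have hpos : 0 < r.count false := List.count_pos_iff.mpr (hrj ▸ List.getElem_mem hj)
        simp [hrj] at this
        omega
      simp [pvSetVis, pvCountFalse, List.modify_cons]
      omega
    | succ i' =>
      have h' : pvGetVis rest i' j = false := by simpa [pvGetVis] using h
      have := ih i' h'
      simp [pvSetVis, pvCountFalse, List.modify_cons] at *
      omega

theorem pvBfsNb_measure (N id x y : Int) (s : List (List Int) × List (List Bool) × List (Int × Int))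
    (dxy : Int × Int) :
    pvCountFalse (pvBfsNb N id x y s dxy).2.1 + (pvBfsNb N id x y s dxy).2.2.length
      = pvCountFalse s.2.1 + s.2.2.length := by
  unfold pvBfsNb
  split
  · split
    · rename_i h1 h2
      have := pvCountFalse_setVis s.2.1 (x + dxy.1).toNat (y + dxy.2).toNat h2.2
      simp
      omega
    · rfl
  · rfl

theorem pvBfsNb_foldl_measure (N id x y : Int) (ds : List (Int × Int))
    (s : List (List Int) × List (List Bool) × List (Int × Int)) :
    pvCountFalse (ds.foldl (pvBfsNb N id x y) s).2.1 + (ds.foldl (pvBfsNb N id x y) s).2.2.length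
      = pvCountFalse s.2.1 + s.2.2.length := by
  induction ds generalizing s with
  | nil => rfl
  | cons d ds ih => simpa [List.foldl_cons, ih] using (pvBfsNb_measure N id x y s d)


-- ============ basic grid-access lemmas ============
theorem pvGetCell_setCell_self (m : List (List Int)) (i j : Nat) (v : Int)
    (hi : i < m.length) (hj : j < (m.getD i []).length) :
    pvGetCell (pvSetCell m i j v) i j = v := by
  simp [pvGetCell, pvSetCell, List.getD_eq_getElem?_getD, List.getElem?_modify,
    List.getElem?_eq_getElem hi]
  have hj' : j < m[i].length := by simpa [List.getElem?_eq_getElem hi] using hj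
  simp [List.getElem?_set, hj']

theorem pvGetCell_setCell_ne (m : List (List Int)) (i j a b : Nat) (v : Int)
    (h : ¬(i = a ∧ j = b)) :
    pvGetCell (pvSetCell m i j v) a b = pvGetCell m a b := by
  by_cases hia : i = a
  · subst hia
    have hjb : j ≠ b := fun hh => h ⟨rfl, hh⟩
    simp [pvGetCell, pvSetCell, List.getD_eq_getElem?_getD, List.getElem?_modify]
    cases hrow : m[i]? with
    | none => simp
    | some r => simp [List.getElem?_set, hjb, Ne.symm hjb]
  · simp [pvGetCell, pvSetCell, List.getD_eq_getElem?_getD, List.getElem?_modify, Ne.symm hia, hia]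

theorem pvShape_setCell (m : List (List Int)) (i j : Nat) (v : Int) :
    (pvSetCell m i j v).length = m.length ∧
      ∀ a, ((pvSetCell m i j v).getD a []).length = (m.getD a []).length := by
  refine ⟨by simp [pvSetCell], fun a => ?_⟩
  by_cases hia : i = a
  · subst hia
    simp [pvSetCell, List.getD_eq_getElem?_getD, List.getElem?_modify]
    cases hrow : m[i]? with
    | none => simp
    | some r => simp
  · simp [pvSetCell, List.getD_eq_getElem?_getD, List.getElem?_modify, hia]

theorem pvGetVis_setVis_self (v : List (List Bool)) (i j : Nat)
    (hi : i < v.length) (hj : j < (v.getD i []).length) :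
    pvGetVis (pvSetVis v i j) i j = true := by
  simp [pvGetVis, pvSetVis, List.getD_eq_getElem?_getD, List.getElem?_modify,
    List.getElem?_eq_getElem hi]
  have hj' : j < v[i].length := by simpa [List.getElem?_eq_getElem hi] using hj
  simp [List.getElem?_set, hj']

theorem pvGetVis_setVis_ne (v : List (List Bool)) (i j a b : Nat)
    (h : ¬(i = a ∧ j = b)) :
    pvGetVis (pvSetVis v i j) a b = pvGetVis v a b := by
  by_cases hia : i = a
  · subst hia
    have hjb : j ≠ b := fun hh => h ⟨rfl, hh⟩
    simp [pvGetVis, pvSetVis, List.getD_eq_getElem?_getD, List.getElem?_modify]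
    cases hrow : v[i]? with
    | none => simp
    | some r => simp [List.getElem?_set, hjb, Ne.symm hjb]
  · simp [pvGetVis, pvSetVis, List.getD_eq_getElem?_getD, List.getElem?_modify, Ne.symm hia, hia]

theorem pvVisShape_setVis (v : List (List Bool)) (i j : Nat) :
    (pvSetVis v i j).length = v.length ∧
      ∀ a, ((pvSetVis v i j).getD a []).length = (v.getD a []).length := by
  refine ⟨by simp [pvSetVis], fun a => ?_⟩
  by_cases hia : i = a
  · subst hia
    simp [pvSetVis, List.getD_eq_getElem?_getD, List.getElem?_modify]
    cases hrow : v[i]? with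
    | none => simp
    | some r => simp
  · simp [pvSetVis, List.getD_eq_getElem?_getD, List.getElem?_modify, hia]

theorem pvGetVis_replicate (n i j : Nat) (hi : i < n) (hj : j < n) :
    pvGetVis (List.replicate n (List.replicate n false)) i j = false := by
  simp [pvGetVis, List.getD_eq_getElem?_getD, List.getElem?_replicate, hi, hj]

-- two grids with equal shape and pointwise equal cells are equal
theorem pvEq_of_getCell (a b : List (List Int))
    (hlen : a.length = b.length)
    (hrow : ∀ i, (a.getD i []).length = (b.getD i []).length)
    (hget : ∀ i j, pvGetCell a i j = pvGetCell b i j) : a = b := by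
  apply List.ext_getElem hlen
  intro i hi hi'
  apply List.ext_getElem
  · have := hrow i
    simpa [List.getD_eq_getElem?_getD, List.getElem?_eq_getElem, hi, hi'] using this
  · intro j hj hj'
    have := hget i j
    simpa [pvGetCell, List.getD_eq_getElem?_getD, List.getElem?_eq_getElem, hi, hi', hj, hj'] using this
-- ============ the abstract specification layer ============
def pvLand (orig : List (List Int)) (n : Nat) (c : Nat × Nat) : Prop :=
  c.1 < n ∧ c.2 < n ∧ pvGetCell orig c.1 c.2 = 1

def pvAdjStep (c d : Nat × Nat) : Prop :=
  (c.1 = d.1 ∧ (c.2 = d.2 + 1 ∨ d.2 = c.2 + 1)) ∨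
  (c.2 = d.2 ∧ (c.1 = d.1 + 1 ∨ d.1 = c.1 + 1))

def pvAdj (orig : List (List Int)) (n : Nat) (c d : Nat × Nat) : Prop :=
  pvLand orig n c ∧ pvLand orig n d ∧ pvAdjStep c d

def pvConn (orig : List (List Int)) (n : Nat) : Nat × Nat → Nat × Nat → Prop :=
  Relation.ReflTransGen (pvAdj orig n)

theorem pvAdjStep_symm {c d : Nat × Nat} (h : pvAdjStep c d) : pvAdjStep d c := by
  unfold pvAdjStep at *; tauto

theorem pvAdj_symm {orig n} {c d : Nat × Nat} (h : pvAdj orig n c d) : pvAdj orig n d c :=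
  ⟨h.2.1, h.1, pvAdjStep_symm h.2.2⟩

theorem pvConn_symm {orig n} {c d : Nat × Nat} (h : pvConn orig n c d) : pvConn orig n d c :=
  Relation.ReflTransGen.symmetric (fun _ _ => pvAdj_symm) h

theorem pvConn_trans {orig n} {c d e : Nat × Nat} (h1 : pvConn orig n c d)
    (h2 : pvConn orig n d e) : pvConn orig n c e := Relation.ReflTransGen.trans h1 h2

theorem pvConn_land {orig n} {c d : Nat × Nat} (hc : pvLand orig n c)
    (h : pvConn orig n c d) : pvLand orig n d := by
  induction h with
  | refl => exact hc
  | tail _ hadj ih => exact hadj.2.1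

-- row-major index
def pvRm (n : Nat) (c : Nat × Nat) : Nat := c.1 * n + c.2

theorem pvRm_div {n : Nat} {c : Nat × Nat} (h : c.2 < n) : pvRm n c / n = c.1 := by
  have hn : 0 < n := by omega
  unfold pvRm
  rw [show c.1 * n + c.2 = c.2 + n * c.1 by ring, Nat.add_mul_div_left _ _ hn,
    Nat.div_eq_of_lt h, Nat.zero_add]

theorem pvRm_mod {n : Nat} {c : Nat × Nat} (h : c.2 < n) : pvRm n c % n = c.2 := by
  unfold pvRm
  rw [show c.1 * n + c.2 = c.2 + n * c.1 by ring, Nat.add_mul_mod_self_left,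
    Nat.mod_eq_of_lt h]

theorem pvRm_inj {n : Nat} {c d : Nat × Nat} (hc : c.2 < n) (hd : d.2 < n)
    (h : pvRm n c = pvRm n d) : c = d := by
  have h1 : c.1 = d.1 := by rw [← pvRm_div hc, ← pvRm_div hd, h]
  have h2 : c.2 = d.2 := by rw [← pvRm_mod hc, ← pvRm_mod hd, h]
  exact Prod.ext h1 h2

theorem pvRm_lt {n : Nat} {c : Nat × Nat} (h1 : c.1 < n) (h2 : c.2 < n) : pvRm n c < n * n := by
  unfold pvRm; nlinarith

-- rm of the first (row-major) cell of c's component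
noncomputable def pvRootRm (orig : List (List Int)) (n : Nat) (c : Nat × Nat) : Nat :=
  sInf {k | ∃ d, pvLand orig n d ∧ pvConn orig n c d ∧ pvRm n d = k}

-- the first (row-major) cell of c's component
noncomputable def pvRoot (orig : List (List Int)) (n : Nat) (c : Nat × Nat) : Nat × Nat :=
  (pvRootRm orig n c / n, pvRootRm orig n c % n)

theorem pvRootRm_spec {orig n} {c : Nat × Nat} (hc : pvLand orig n c) :
    ∃ d, pvLand orig n d ∧ pvConn orig n c d ∧ pvRm n d = pvRootRm orig n c := by
  have hne : {k | ∃ d, pvLand orig n d ∧ pvConn orig n c d ∧ pvRm n d = k}.Nonempty :=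
    ⟨pvRm n c, c, hc, Relation.ReflTransGen.refl, rfl⟩
  exact Nat.sInf_mem hne

theorem pvRootRm_le {orig n} {c d : Nat × Nat} (hd : pvLand orig n d)
    (h : pvConn orig n c d) : pvRootRm orig n c ≤ pvRm n d :=
  Nat.sInf_le ⟨d, hd, h, rfl⟩

theorem pvRoot_spec {orig n} {c : Nat × Nat} (hc : pvLand orig n c) :
    pvLand orig n (pvRoot orig n c) ∧ pvConn orig n c (pvRoot orig n c) ∧
      pvRm n (pvRoot orig n c) = pvRootRm orig n c := by
  obtain ⟨d, hd, hconn, hrm⟩ := pvRootRm_spec hc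
  have : pvRoot orig n c = d := by
    unfold pvRoot
    rw [← hrm, pvRm_div hd.2.1, pvRm_mod hd.2.1]
  rw [this]; exact ⟨hd, hconn, hrm⟩

theorem pvRootRm_congr {orig n} {c d : Nat × Nat} (h : pvConn orig n c d) :
    pvRootRm orig n c = pvRootRm orig n d := by
  unfold pvRootRm
  congr 1
  ext k
  constructor
  · rintro ⟨e, he, hce, rfl⟩; exact ⟨e, he, pvConn_trans (pvConn_symm h) hce, rfl⟩
  · rintro ⟨e, he, hde, rfl⟩; exact ⟨e, he, pvConn_trans h hde, rfl⟩

def pvIsRoot (orig : List (List Int)) (n : Nat) (c : Nat × Nat) : Prop :=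
  pvLand orig n c ∧ pvRoot orig n c = c

theorem pvIsRoot_root {orig n} {c : Nat × Nat} (hc : pvLand orig n c) :
    pvIsRoot orig n (pvRoot orig n c) := by
  obtain ⟨hl, hconn, hrm⟩ := pvRoot_spec hc
  refine ⟨hl, ?_⟩
  obtain ⟨hl2, hconn2, hrm2⟩ := pvRoot_spec hl
  have heq : pvRootRm orig n (pvRoot orig n c) = pvRootRm orig n c := by
    rw [pvRootRm_congr (pvConn_symm hconn)]
  apply pvRm_inj hl2.2.1 hl.2.1
  rw [hrm2, heq, hrm]

theorem pvRoot_eq_iff {orig n} {c r : Nat × Nat} (hc : pvLand orig n c)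
    (hr : pvIsRoot orig n r) : pvRoot orig n c = r ↔ pvConn orig n r c := by
  constructor
  · intro h
    have := (pvRoot_spec hc).2.1
    rw [h] at this
    exact pvConn_symm this
  · intro h
    obtain ⟨hl, hconn, hrm⟩ := pvRoot_spec hc
    have heq : pvRootRm orig n c = pvRootRm orig n r := pvRootRm_congr (pvConn_symm h)
    have h3 : pvRm n r = pvRootRm orig n r := by
      conv_lhs => rw [← hr.2]
      rw [(pvRoot_spec hr.1).2.2]
    apply pvRm_inj hl.2.1 hr.1.2.1
    rw [hrm, heq, h3]

-- components are counted through their roots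
def pvRootsBelow (orig : List (List Int)) (n t : Nat) : Set (Nat × Nat) :=
  {c | pvIsRoot orig n c ∧ pvRm n c < t}

theorem pvRootsBelow_finite (orig : List (List Int)) (n t : Nat) :
    (pvRootsBelow orig n t).Finite := by
  apply Set.Finite.subset ((Set.finite_Iio n).prod (Set.finite_Iio n))
  rintro ⟨a, b⟩ ⟨⟨hl, _⟩, _⟩
  exact ⟨hl.1, hl.2.1⟩

-- the label a land cell receives
noncomputable def pvLabel (orig : List (List Int)) (n : Nat) (c : Nat × Nat) : Int :=
  2 + ((pvRootsBelow orig n (pvRootRm orig n c)).ncard : Int)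
-- ============ A-side: BFS flood-fill analysis ============

-- dynamic invariant of A's BFS loop state (the closure condition is threaded separately)
structure PvBfsInv (orig : List (List Int)) (N : Int) (n : Nat) (id : Int) (c₀ : Nat × Nat)
    (P : Set (Nat × Nat)) (W : Set (Nat × Nat)) (M₀ : Nat → Nat → Int)
    (m : List (List Int)) (v : List (List Bool)) (q : List (Int × Int)) : Prop where
  vlen : v.length = n
  vrow : ∀ a, a < n → (v.getD a []).length = n
  vis : ∀ a b, a < n → b < n → (pvGetVis v a b = true ↔ (a, b) ∈ P ∪ W)
  mlen : m.length = orig.length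
  mrow : ∀ a, (m.getD a []).length = (orig.getD a []).length
  mW : ∀ c ∈ W, pvGetCell m c.1 c.2 = id
  mBg : ∀ a b, (a, b) ∉ W → pvGetCell m a b = M₀ a b
  qmem : ∀ p ∈ q, 0 ≤ p.1 ∧ p.1 < N ∧ 0 ≤ p.2 ∧ p.2 < N ∧ (p.1.toNat, p.2.toNat) ∈ W
  wconn : ∀ c ∈ W, pvConn orig n c₀ c

-- a direction step from an in-range cell lands on an adjacent cell
theorem pvDir_adj (orig : List (List Int)) (N : Int) (n : Nat) (hn : n = N.toNat)
    {x y : Int} {dxy : Int × Int} (hd : dxy ∈ pvDirs) (hx : 0 ≤ x) (hy : 0 ≤ y)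
    (hr : 0 ≤ x + dxy.1 ∧ x + dxy.1 < N ∧ 0 ≤ y + dxy.2 ∧ y + dxy.2 < N)
    (hl1 : pvLand orig n (x.toNat, y.toNat))
    (hl2 : pvLand orig n ((x + dxy.1).toNat, (y + dxy.2).toNat)) :
    pvAdj orig n (x.toNat, y.toNat) ((x + dxy.1).toNat, (y + dxy.2).toNat) := by
  refine ⟨hl1, hl2, ?_⟩
  simp [pvDirs] at hd
  unfold pvAdjStep
  rcases hd with h | h | h | h <;> subst h <;> simp <;> omega

-- every cell adjacent to an in-range cell is reached by one of the four directions
theorem pvAdj_to_dir (orig : List (List Int)) (N : Int) (n : Nat) (hn : n = N.toNat)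
    {x y : Int} (hx : 0 ≤ x) (hxN : x < N) (hy : 0 ≤ y) (hyN : y < N)
    {d : Nat × Nat} (hadj : pvAdj orig n (x.toNat, y.toNat) d) :
    ∃ dxy ∈ pvDirs, (0 ≤ x + dxy.1 ∧ x + dxy.1 < N ∧ 0 ≤ y + dxy.2 ∧ y + dxy.2 < N) ∧
      d = ((x + dxy.1).toNat, (y + dxy.2).toNat) := by
  obtain ⟨hl1, hl2, hstep⟩ := hadj
  have hd1 : d.1 < n := hl2.1
  have hd2 : d.2 < n := hl2.2.1
  unfold pvAdjStep at hstep
  rcases hstep with ⟨he, h | h⟩ | ⟨he, h | h⟩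
  · refine ⟨(0, -1), by simp [pvDirs], by simp; omega, ?_⟩
    apply Prod.ext <;> simp <;> omega
  · refine ⟨(0, 1), by simp [pvDirs], by simp; omega, ?_⟩
    apply Prod.ext <;> simp <;> omega
  · refine ⟨(-1, 0), by simp [pvDirs], by simp; omega, ?_⟩
    apply Prod.ext <;> simp <;> omega
  · refine ⟨(1, 0), by simp [pvDirs], by simp; omega, ?_⟩
    apply Prod.ext <;> simp <;> omega

theorem pvBfsNb_invar
    (orig : List (List Int)) (N : Int) (n : Nat) (id : Int) (c₀ : Nat × Nat)
    (P W : Set (Nat × Nat)) (M₀ : Nat → Nat → Int)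
    (hn : n = N.toNat)
    (holen : n ≤ orig.length) (horow : ∀ a, a < n → n ≤ (orig.getD a []).length)
    (hc₀ : pvLand orig n c₀)
    (hP : ∀ c ∈ P, ¬ pvConn orig n c₀ c)
    (hM₀ : ∀ a b, (a, b) ∉ P → M₀ a b = pvGetCell orig a b)
    (m : List (List Int)) (v : List (List Bool)) (q : List (Int × Int))
    (inv : PvBfsInv orig N n id c₀ P W M₀ m v q)
    (x y : Int) (hx : 0 ≤ x) (hxN : x < N) (hy : 0 ≤ y) (hyN : y < N)
    (hxyW : (x.toNat, y.toNat) ∈ W)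
    (dxy : Int × Int) (hd : dxy ∈ pvDirs) :
    ∃ W' t, W ⊆ W' ∧
      (pvBfsNb N id x y (m, v, q) dxy).2.2 = q ++ t ∧
      (∀ p ∈ t, (p.1.toNat, p.2.toNat) ∈ W' ∧ (p.1.toNat, p.2.toNat) ∉ W) ∧
      (∀ c ∈ W', c ∈ W ∨ ∃ p ∈ t, (p.1.toNat, p.2.toNat) = c) ∧
      PvBfsInv orig N n id c₀ P W' M₀ (pvBfsNb N id x y (m, v, q) dxy).1
        (pvBfsNb N id x y (m, v, q) dxy).2.1 (pvBfsNb N id x y (m, v, q) dxy).2.2 ∧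
      ((0 ≤ x + dxy.1 ∧ x + dxy.1 < N ∧ 0 ≤ y + dxy.2 ∧ y + dxy.2 < N) →
        pvLand orig n ((x + dxy.1).toNat, (y + dxy.2).toNat) →
        ((x + dxy.1).toNat, (y + dxy.2).toNat) ∈ W') := by
  have hlxy : pvLand orig n (x.toNat, y.toNat) := pvConn_land hc₀ (inv.wconn _ hxyW)
  by_cases hr : 0 ≤ x + dxy.1 ∧ x + dxy.1 < N ∧ 0 ≤ y + dxy.2 ∧ y + dxy.2 < N
  · have hnb1 : (x + dxy.1).toNat < n := by omega
    have hnb2 : (y + dxy.2).toNat < n := by omega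
    by_cases htest : pvGetCell m (x + dxy.1).toNat (y + dxy.2).toNat = 1 ∧
        pvGetVis v (x + dxy.1).toNat (y + dxy.2).toNat = false
    · -- new cell is marked
      have hres : pvBfsNb N id x y (m, v, q) dxy =
          (pvSetCell m (x + dxy.1).toNat (y + dxy.2).toNat id,
           pvSetVis v (x + dxy.1).toNat (y + dxy.2).toNat,
           q ++ [(x + dxy.1, y + dxy.2)]) := by
        unfold pvBfsNb; rw [if_pos hr, if_pos htest]
      have hnotPW : ((x + dxy.1).toNat, (y + dxy.2).toNat) ∉ P ∪ W := by
        intro hmem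
        have := (inv.vis _ _ hnb1 hnb2).2 hmem
        rw [htest.2] at this; exact Bool.false_ne_true this
      have hnotP : ((x + dxy.1).toNat, (y + dxy.2).toNat) ∉ P := fun h => hnotPW (Or.inl h)
      have hnotW : ((x + dxy.1).toNat, (y + dxy.2).toNat) ∉ W := fun h => hnotPW (Or.inr h)
      have hlnb : pvLand orig n ((x + dxy.1).toNat, (y + dxy.2).toNat) := by
        refine ⟨hnb1, hnb2, ?_⟩
        rw [← hM₀ _ _ hnotP, ← inv.mBg _ _ hnotW]; exact htest.1
      have hadj := pvDir_adj orig N n hn hd hx hy hr hlxy hlnb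
      have hconnnb : pvConn orig n c₀ ((x + dxy.1).toNat, (y + dxy.2).toNat) :=
        Relation.ReflTransGen.tail (inv.wconn _ hxyW) hadj
      have hmin : (x + dxy.1).toNat < m.length := by rw [inv.mlen]; omega
      have hmrow : (y + dxy.2).toNat < (m.getD (x + dxy.1).toNat []).length := by
        rw [inv.mrow]; have := horow _ hnb1; omega
      have hvin : (x + dxy.1).toNat < v.length := by rw [inv.vlen]; exact hnb1
      have hvrow : (y + dxy.2).toNat < (v.getD (x + dxy.1).toNat []).length := by
        rw [inv.vrow _ hnb1]; exact hnb2
      refine ⟨insert ((x + dxy.1).toNat, (y + dxy.2).toNat) W, [(x + dxy.1, y + dxy.2)],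
        fun c hc => Set.mem_insert_of_mem _ hc, by rw [hres], ?_, ?_, ?_, ?_⟩
      · intro p hp; simp at hp; subst hp
        exact ⟨Set.mem_insert _ _, hnotW⟩
      · intro c hc
        rcases Set.mem_insert_iff.mp hc with h | h
        · exact Or.inr ⟨(x + dxy.1, y + dxy.2), by simp, h.symm⟩
        · exact Or.inl h
      · rw [hres]
        constructor
        · simp [(pvVisShape_setVis v _ _).1, inv.vlen]
        · intro a ha; rw [(pvVisShape_setVis v _ _).2 a]; exact inv.vrow a ha
        · intro a b ha hb
          by_cases hab : (x + dxy.1).toNat = a ∧ (y + dxy.2).toNat = b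
          · obtain ⟨rfl, rfl⟩ := hab
            rw [pvGetVis_setVis_self v _ _ hvin hvrow]
            simp only [true_iff]
            exact Or.inr (Set.mem_insert _ _)
          · rw [pvGetVis_setVis_ne v _ _ _ _ hab, inv.vis a b ha hb]
            have : (a, b) ≠ ((x + dxy.1).toNat, (y + dxy.2).toNat) := by
              intro h; exact hab ⟨congrArg Prod.fst h.symm, congrArg Prod.snd h.symm⟩
            constructor
            · rintro (h | h); exact Or.inl h; exact Or.inr (Set.mem_insert_of_mem _ h)
            · rintro (h | h); exact Or.inl h
              rcases Set.mem_insert_iff.mp h with h' | h'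
              · exact absurd h' this
              · exact Or.inr h'
        · simp [(pvShape_setCell m _ _ _).1, inv.mlen]
        · intro a; rw [(pvShape_setCell m _ _ _).2 a]; exact inv.mrow a
        · intro c hc
          rcases Set.mem_insert_iff.mp hc with h | h
          · subst h; exact pvGetCell_setCell_self m _ _ id hmin hmrow
          · have hne : ¬((x + dxy.1).toNat = c.1 ∧ (y + dxy.2).toNat = c.2) := by
              rintro ⟨h1, h2⟩
              apply hnotW
              have : c = ((x + dxy.1).toNat, (y + dxy.2).toNat) := by
                apply Prod.ext <;> simp [← h1, ← h2]
              rwa [this] at h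
            rw [pvGetCell_setCell_ne m _ _ _ _ _ hne]; exact inv.mW c h
        · intro a b hab
          have hne : ¬((x + dxy.1).toNat = a ∧ (y + dxy.2).toNat = b) := by
            rintro ⟨rfl, rfl⟩; exact hab (Set.mem_insert _ _)
          rw [pvGetCell_setCell_ne m _ _ _ _ _ hne]
          exact inv.mBg a b (fun h => hab (Set.mem_insert_of_mem _ h))
        · intro p hp
          rcases List.mem_append.mp hp with h | h
          · have := inv.qmem p h
            exact ⟨this.1, this.2.1, this.2.2.1, this.2.2.2.1,
              Set.mem_insert_of_mem _ this.2.2.2.2⟩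
          · simp at h; subst h
            exact ⟨hr.1, hr.2.1, hr.2.2.1, hr.2.2.2, Set.mem_insert _ _⟩
        · intro c hc
          rcases Set.mem_insert_iff.mp hc with h | h
          · subst h; exact hconnnb
          · exact inv.wconn c h
      · intro _ _; exact Set.mem_insert _ _
    · -- nothing happens
      have hres : pvBfsNb N id x y (m, v, q) dxy = (m, v, q) := by
        unfold pvBfsNb; rw [if_pos hr, if_neg htest]
      refine ⟨W, [], fun c hc => hc, by rw [hres]; simp, by simp, fun c hc => Or.inl hc,
        by rw [hres]; exact inv, ?_⟩
      intro _ hlnb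
      have hadj := pvDir_adj orig N n hn hd hx hy hr hlxy hlnb
      by_cases hvis : pvGetVis v (x + dxy.1).toNat (y + dxy.2).toNat = true
      · rcases (inv.vis _ _ hnb1 hnb2).1 hvis with h | h
        · exact absurd (Relation.ReflTransGen.tail (inv.wconn _ hxyW) hadj) (hP _ h)
        · exact h
      · by_contra hnW
        have hnP : ((x + dxy.1).toNat, (y + dxy.2).toNat) ∉ P := by
          intro h
          exact hvis ((inv.vis _ _ hnb1 hnb2).2 (Or.inl h))
        have : pvGetCell m (x + dxy.1).toNat (y + dxy.2).toNat = 1 := by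
          rw [inv.mBg _ _ hnW, hM₀ _ _ hnP]; exact hlnb.2.2
        exact htest ⟨this, by simpa using hvis⟩
  · have hres : pvBfsNb N id x y (m, v, q) dxy = (m, v, q) := by
      unfold pvBfsNb; rw [if_neg hr]
    exact ⟨W, [], fun c hc => hc, by rw [hres]; simp, by simp, fun c hc => Or.inl hc,
      by rw [hres]; exact inv, fun h => absurd h hr⟩

theorem pvBfsNb_foldl_invar
    (orig : List (List Int)) (N : Int) (n : Nat) (id : Int) (c₀ : Nat × Nat)
    (P : Set (Nat × Nat)) (M₀ : Nat → Nat → Int)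
    (hn : n = N.toNat)
    (holen : n ≤ orig.length) (horow : ∀ a, a < n → n ≤ (orig.getD a []).length)
    (hc₀ : pvLand orig n c₀)
    (hP : ∀ c ∈ P, ¬ pvConn orig n c₀ c)
    (hM₀ : ∀ a b, (a, b) ∉ P → M₀ a b = pvGetCell orig a b)
    (x y : Int) (hx : 0 ≤ x) (hxN : x < N) (hy : 0 ≤ y) (hyN : y < N) :
    ∀ (ds : List (Int × Int)), (∀ d ∈ ds, d ∈ pvDirs) →
    ∀ (m : List (List Int)) (v : List (List Bool)) (q : List (Int × Int)) (W : Set (Nat × Nat)),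
      PvBfsInv orig N n id c₀ P W M₀ m v q → (x.toNat, y.toNat) ∈ W →
    ∃ W' t, W ⊆ W' ∧
      (ds.foldl (pvBfsNb N id x y) (m, v, q)).2.2 = q ++ t ∧
      (∀ p ∈ t, (p.1.toNat, p.2.toNat) ∈ W') ∧
      (∀ c ∈ W', c ∈ W ∨ ∃ p ∈ t, (p.1.toNat, p.2.toNat) = c) ∧
      PvBfsInv orig N n id c₀ P W' M₀ (ds.foldl (pvBfsNb N id x y) (m, v, q)).1
        (ds.foldl (pvBfsNb N id x y) (m, v, q)).2.1 (ds.foldl (pvBfsNb N id x y) (m, v, q)).2.2 ∧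
      (∀ dxy ∈ ds, (0 ≤ x + dxy.1 ∧ x + dxy.1 < N ∧ 0 ≤ y + dxy.2 ∧ y + dxy.2 < N) →
        pvLand orig n ((x + dxy.1).toNat, (y + dxy.2).toNat) →
        ((x + dxy.1).toNat, (y + dxy.2).toNat) ∈ W') := by
  intro ds
  induction ds with
  | nil =>
    intro _ m v q W inv hxyW
    exact ⟨W, [], fun c hc => hc, by simp, by simp, fun c hc => Or.inl hc, by simpa using inv,
      by simp⟩
  | cons d ds ih =>
    intro hds m v q W inv hxyW
    obtain ⟨W1, t1, hWW1, hq1, ht1, hW1c, inv1, hcov1⟩ :=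
      pvBfsNb_invar orig N n id c₀ P W M₀ hn holen horow hc₀ hP hM₀ m v q inv
        x y hx hxN hy hyN hxyW d (hds d (by simp))
    set s1 := pvBfsNb N id x y (m, v, q) d with hs1
    obtain ⟨W2, t2, hW1W2, hq2, ht2, hW2c, inv2, hcov2⟩ :=
      ih (fun d' hd' => hds d' (by simp [hd'])) s1.1 s1.2.1 s1.2.2 W1
        (by simpa using inv1) (hWW1 hxyW)
    refine ⟨W2, t1 ++ t2, fun c hc => hW1W2 (hWW1 hc), ?_, ?_, ?_, ?_, ?_⟩
    · rw [List.foldl_cons, ← hs1]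
      rw [hq2, hq1, List.append_assoc]
    · intro p hp
      rcases List.mem_append.mp hp with h | h
      · exact hW1W2 (ht1 p h).1
      · exact ht2 p h
    · intro c hc
      rcases hW2c c hc with h | h
      · rcases hW1c c h with h' | h'
        · exact Or.inl h'
        · obtain ⟨p, hp, hpc⟩ := h'
          exact Or.inr ⟨p, List.mem_append_left _ hp, hpc⟩
      · obtain ⟨p, hp, hpc⟩ := h
        exact Or.inr ⟨p, List.mem_append_right _ hp, hpc⟩
    · rw [List.foldl_cons, ← hs1]; exact inv2
    · intro dxy hdxy hr hl
      rcases List.mem_cons.mp hdxy with h | h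
      · subst h; exact hW1W2 (hcov1 hr hl)
      · exact hcov2 dxy h hr hl

-- what A's BFS leaves behind: the whole component of the seed is painted `id`,
-- everything else keeps the background value; visited gains exactly the component
structure PvBfsOut (orig : List (List Int)) (N : Int) (n : Nat) (id : Int) (c₀ : Nat × Nat)
    (P : Set (Nat × Nat)) (M₀ : Nat → Nat → Int)
    (m' : List (List Int)) (v' : List (List Bool)) : Prop where
  vlen : v'.length = n
  vrow : ∀ a, a < n → (v'.getD a []).length = n
  vis : ∀ a b, a < n → b < n →
    (pvGetVis v' a b = true ↔ (a, b) ∈ P ∨ pvConn orig n c₀ (a, b))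
  mlen : m'.length = orig.length
  mrow : ∀ a, (m'.getD a []).length = (orig.getD a []).length
  mConn : ∀ c : Nat × Nat, pvConn orig n c₀ c → pvGetCell m' c.1 c.2 = id
  mBg : ∀ a b, ¬ pvConn orig n c₀ (a, b) → pvGetCell m' a b = M₀ a b

theorem pvBfs_nil (N id : Int) (fuel : Nat) (m : List (List Int)) (v : List (List Bool)) :
    pvBfs N id fuel m v [] = (m, v) := by cases fuel <;> rfl

theorem pvBfs_correct
    (orig : List (List Int)) (N : Int) (n : Nat) (id : Int) (c₀ : Nat × Nat)
    (P : Set (Nat × Nat)) (M₀ : Nat → Nat → Int)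
    (hn : n = N.toNat)
    (holen : n ≤ orig.length) (horow : ∀ a, a < n → n ≤ (orig.getD a []).length)
    (hc₀ : pvLand orig n c₀)
    (hP : ∀ c ∈ P, ¬ pvConn orig n c₀ c)
    (hM₀ : ∀ a b, (a, b) ∉ P → M₀ a b = pvGetCell orig a b) :
    ∀ (fuel : Nat) (m : List (List Int)) (v : List (List Bool)) (q : List (Int × Int))
      (W : Set (Nat × Nat)),
      PvBfsInv orig N n id c₀ P W M₀ m v q →
      (∀ c ∈ W, (∀ p ∈ q, (p.1.toNat, p.2.toNat) ≠ c) → ∀ d, pvAdj orig n c d → d ∈ W) →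
      c₀ ∈ W →
      pvCountFalse v + q.length ≤ fuel →
      PvBfsOut orig N n id c₀ P M₀ (pvBfs N id fuel m v q).1 (pvBfs N id fuel m v q).2 := by
  intro fuel
  induction fuel with
  | zero =>
    intro m v q W inv hclosed hc₀W hfuel
    match q, hfuel with
    | [], hfuel =>
      rw [pvBfs_nil]
      have hWfull : ∀ c, pvConn orig n c₀ c → c ∈ W := by
        intro c hconn
        induction hconn with
        | refl => exact hc₀W
        | tail hpath hadj ih => exact hclosed _ ih (by simp) _ hadj
      refine ⟨inv.vlen, inv.vrow, ?_, inv.mlen, inv.mrow, ?_, ?_⟩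
      · intro a b ha hb
        rw [inv.vis a b ha hb]
        constructor
        · rintro (h | h); exact Or.inl h; exact Or.inr (inv.wconn _ h)
        · rintro (h | h); exact Or.inl h; exact Or.inr (hWfull _ h)
      · intro c hconn; exact inv.mW c (hWfull c hconn)
      · intro a b hnconn; exact inv.mBg a b (fun h => hnconn (inv.wconn _ h))
    | (x, y) :: q', hfuel => simp at hfuel
  | succ fuel ih =>
    intro m v q W inv hclosed hc₀W hfuel
    match q with
    | [] =>
      rw [pvBfs_nil]
      have hWfull : ∀ c, pvConn orig n c₀ c → c ∈ W := by
        intro c hconn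
        induction hconn with
        | refl => exact hc₀W
        | tail hpath hadj ih2 => exact hclosed _ ih2 (by simp) _ hadj
      refine ⟨inv.vlen, inv.vrow, ?_, inv.mlen, inv.mrow, ?_, ?_⟩
      · intro a b ha hb
        rw [inv.vis a b ha hb]
        constructor
        · rintro (h | h); exact Or.inl h; exact Or.inr (inv.wconn _ h)
        · rintro (h | h); exact Or.inl h; exact Or.inr (hWfull _ h)
      · intro c hconn; exact inv.mW c (hWfull c hconn)
      · intro a b hnconn; exact inv.mBg a b (fun h => hnconn (inv.wconn _ h))
    | (x, y) :: q' =>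
      have hpop := inv.qmem (x, y) (by simp)
      obtain ⟨hx, hxN, hy, hyN, hxyW⟩ := hpop
      have inv' : PvBfsInv orig N n id c₀ P W M₀ m v q' :=
        { inv with qmem := fun p hp => inv.qmem p (by simp [hp]) }
      obtain ⟨W', t, hWW', hqeq, htW, hW'c, invF, hcov⟩ :=
        pvBfsNb_foldl_invar orig N n id c₀ P M₀ hn holen horow hc₀ hP hM₀
          x y hx hxN hy hyN pvDirs (fun d hd => hd) m v q' W inv' hxyW
      have hclosed' : ∀ c ∈ W',
          (∀ p ∈ (pvDirs.foldl (pvBfsNb N id x y) (m, v, q')).2.2, (p.1.toNat, p.2.toNat) ≠ c) →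
          ∀ d, pvAdj orig n c d → d ∈ W' := by
        intro c hc hnotq d hadj
        rcases hW'c c hc with hcW | ⟨p, hp, hpc⟩
        · by_cases hcxy : c = (x.toNat, y.toNat)
          · subst hcxy
            obtain ⟨dxy, hdxy, hr, hdeq⟩ := pvAdj_to_dir orig N n hn hx hxN hy hyN hadj
            rw [hdeq]
            exact hcov dxy hdxy hr (hdeq ▸ hadj.2.1)
          · apply hWW'
            apply hclosed c hcW _ d hadj
            intro p hp
            rcases List.mem_cons.mp hp with h | h
            · subst h; exact fun he => hcxy he.symm
            · exact hnotq p (by rw [hqeq]; exact List.mem_append_left _ h)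
        · exact absurd hpc (hnotq p (by rw [hqeq]; exact List.mem_append_right _ hp))
      have hmeas := pvBfsNb_foldl_measure N id x y pvDirs (m, v, q')
      have hfuel' : pvCountFalse (pvDirs.foldl (pvBfsNb N id x y) (m, v, q')).2.1 +
          (pvDirs.foldl (pvBfsNb N id x y) (m, v, q')).2.2.length ≤ fuel := by
        simp at hmeas hfuel ⊢; omega
      have := ih (pvDirs.foldl (pvBfsNb N id x y) (m, v, q')).1
        (pvDirs.foldl (pvBfsNb N id x y) (m, v, q')).2.1
        (pvDirs.foldl (pvBfsNb N id x y) (m, v, q')).2.2 W'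
        (by simpa using invF) hclosed' (hWW' hc₀W) hfuel'
      simpa [pvBfs] using this

-- ============ A-side: outer double loop ============
structure PvOuterInv (orig : List (List Int)) (N : Int) (n t : Nat)
    (st : List (List Int) × List (List Bool) × Int) : Prop where
  vlen : st.2.1.length = n
  vrow : ∀ a, a < n → (st.2.1.getD a []).length = n
  vis : ∀ a b, a < n → b < n →
    (pvGetVis st.2.1 a b = true ↔ pvLand orig n (a, b) ∧ pvRootRm orig n (a, b) < t)
  mlen : st.1.length = orig.length
  mrow : ∀ a, (st.1.getD a []).length = (orig.getD a []).length
  mLab : ∀ c : Nat × Nat, pvLand orig n c → pvRootRm orig n c < t →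
    pvGetCell st.1 c.1 c.2 = pvLabel orig n c
  mBg : ∀ a b, ¬(pvLand orig n (a, b) ∧ pvRootRm orig n (a, b) < t) →
    pvGetCell st.1 a b = pvGetCell orig a b
  idv : st.2.2 = 2 + ((pvRootsBelow orig n t).ncard : Int)

theorem pvRootsBelow_succ_of_no_root (orig : List (List Int)) (n t : Nat)
    (h : ∀ r, pvIsRoot orig n r → pvRm n r ≠ t) :
    pvRootsBelow orig n (t + 1) = pvRootsBelow orig n t := by
  ext c
  simp only [pvRootsBelow, Set.mem_setOf_eq]
  constructor
  · rintro ⟨hr, hlt⟩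
    refine ⟨hr, ?_⟩
    rcases Nat.lt_succ_iff_lt_or_eq.mp hlt with h' | h'
    · exact h'
    · exact absurd h' (h c hr)
  · rintro ⟨hr, hlt⟩; exact ⟨hr, by omega⟩

theorem pvNoNewVisited (orig : List (List Int)) (n t : Nat)
    (h : ∀ c : Nat × Nat, pvLand orig n c → pvRootRm orig n c ≠ t) :
    ∀ c : Nat × Nat, pvLand orig n c → (pvRootRm orig n c < t + 1 ↔ pvRootRm orig n c < t) := by
  intro c hc
  have := h c hc
  omega

theorem pvStepCell_correct (orig : List (List Int)) (N : Int) (n : Nat)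
    (hn : n = N.toNat)
    (holen : n ≤ orig.length) (horow : ∀ a, a < n → n ≤ (orig.getD a []).length)
    (i j : Int) (hi : 0 ≤ i) (hiN : i < N) (hj : 0 ≤ j) (hjN : j < N)
    (st : List (List Int) × List (List Bool) × Int)
    (inv : PvOuterInv orig N n (pvRm n (i.toNat, j.toNat)) st) :
    PvOuterInv orig N n (pvRm n (i.toNat, j.toNat) + 1) (pvStepCell N st i j) := by
  have hc1 : i.toNat < n := by omega
  have hc2 : j.toNat < n := by omega
  set c₀ : Nat × Nat := (i.toNat, j.toNat) with hc₀def
  set t := pvRm n c₀ with ht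
  by_cases hland : pvLand orig n c₀
  · by_cases hvisited : pvRootRm orig n c₀ < t
    · -- already visited: skip, nothing changes
      have hvis : pvGetVis st.2.1 i.toNat j.toNat = true :=
        (inv.vis _ _ hc1 hc2).2 ⟨hland, hvisited⟩
      have hstep : pvStepCell N st i j = st := by
        unfold pvStepCell
        rw [if_neg]; rintro ⟨_, hf⟩; rw [hvis] at hf; cases hf
      rw [hstep]
      have hno : ∀ c : Nat × Nat, pvLand orig n c → pvRootRm orig n c ≠ t := by
        intro c hc hrm
        obtain ⟨hrl, hrc, hrrm⟩ := pvRoot_spec hc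
        have : pvRoot orig n c = c₀ := pvRm_inj hrl.2.1 hc2 (by rw [hrrm, hrm])
        have h2 : pvRootRm orig n c = pvRootRm orig n c₀ := by
          rw [pvRootRm_congr hrc, this]
        omega
      have hnoroot : ∀ r, pvIsRoot orig n r → pvRm n r ≠ t := by
        intro r hr hrm
        have : pvRootRm orig n r = pvRm n r := by
          conv_rhs => rw [← hr.2]
          rw [(pvRoot_spec hr.1).2.2]
        exact hno r hr.1 (by omega)
      refine ⟨inv.vlen, inv.vrow, ?_, inv.mlen, inv.mrow, ?_, ?_, ?_⟩
      · intro a b ha hb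
        rw [inv.vis a b ha hb]
        constructor
        · rintro ⟨h1, h2⟩; exact ⟨h1, by omega⟩
        · rintro ⟨h1, h2⟩; exact ⟨h1, by rw [pvNoNewVisited orig n t hno _ h1] at h2; exact h2⟩
      · intro c hc hlt
        exact inv.mLab c hc (by rw [← pvNoNewVisited orig n t hno _ hc]; exact hlt)
      · intro a b hcond
        apply inv.mBg
        rintro ⟨h1, h2⟩; exact hcond ⟨h1, by omega⟩
      · rw [inv.idv, pvRootsBelow_succ_of_no_root orig n t hnoroot]
    · -- unvisited land cell: this is a fresh seed, BFS paints its whole component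
      have hrmle : pvRootRm orig n c₀ ≤ t := by
        rw [ht]; exact pvRootRm_le hland Relation.ReflTransGen.refl
      have hrmeq : pvRootRm orig n c₀ = t := by omega
      have hroot : pvIsRoot orig n c₀ := by
        refine ⟨hland, ?_⟩
        obtain ⟨hrl, _, hrrm⟩ := pvRoot_spec hland
        exact pvRm_inj hrl.2.1 hc2 (by rw [hrrm, hrmeq])
      have hvis : pvGetVis st.2.1 i.toNat j.toNat = false := by
        have := inv.vis _ _ hc1 hc2
        rcases Bool.eq_false_or_eq_true (pvGetVis st.2.1 i.toNat j.toNat) with h | h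
        · have h2 := (this.1 h).2
          rw [← hc₀def] at h2
          exact absurd h2 hvisited
        · exact h
      have hcell : pvGetCell st.1 i.toNat j.toNat = 1 := by
        rw [inv.mBg i.toNat j.toNat (by rintro ⟨_, h2⟩; rw [← hc₀def] at h2; omega)]
        exact hland.2.2
      have hstep : pvStepCell N st i j =
          ((pvBfs N st.2.2 (pvCountFalse (pvSetVis st.2.1 i.toNat j.toNat) + 1)
            (pvSetCell st.1 i.toNat j.toNat st.2.2) (pvSetVis st.2.1 i.toNat j.toNat) [(i, j)]).1,
           (pvBfs N st.2.2 (pvCountFalse (pvSetVis st.2.1 i.toNat j.toNat) + 1)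
            (pvSetCell st.1 i.toNat j.toNat st.2.2) (pvSetVis st.2.1 i.toNat j.toNat) [(i, j)]).2,
           st.2.2 + 1) := by
        unfold pvStepCell
        rw [if_pos ⟨hcell, hvis⟩]
      set P : Set (Nat × Nat) := {c | pvLand orig n c ∧ pvRootRm orig n c < t} with hPdef
      have hP : ∀ c ∈ P, ¬ pvConn orig n c₀ c := by
        rintro c ⟨hcl, hclt⟩ hconn
        rw [← pvRootRm_congr hconn] at hclt
        omega
      have hM₀ : ∀ a b, (a, b) ∉ P → pvGetCell st.1 a b = pvGetCell orig a b := by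
        intro a b hab
        exact inv.mBg a b (by rintro ⟨h1, h2⟩; exact hab ⟨h1, h2⟩)
      have hvin : i.toNat < st.2.1.length := by rw [inv.vlen]; exact hc1
      have hvrow : j.toNat < (st.2.1.getD i.toNat []).length := by rw [inv.vrow _ hc1]; exact hc2
      have hmin : i.toNat < st.1.length := by rw [inv.mlen]; omega
      have hmrow : j.toNat < (st.1.getD i.toNat []).length := by
        rw [inv.mrow]; have := horow _ hc1; omega
      have inv0 : PvBfsInv orig N n st.2.2 c₀ P {c₀} (fun a b => pvGetCell st.1 a b)
          (pvSetCell st.1 i.toNat j.toNat st.2.2) (pvSetVis st.2.1 i.toNat j.toNat) [(i, j)] := by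
        constructor
        · simp [(pvVisShape_setVis st.2.1 _ _).1, inv.vlen]
        · intro a ha; rw [(pvVisShape_setVis st.2.1 _ _).2 a]; exact inv.vrow a ha
        · intro a b ha hb
          by_cases hab : i.toNat = a ∧ j.toNat = b
          · obtain ⟨rfl, rfl⟩ := hab
            rw [pvGetVis_setVis_self st.2.1 _ _ hvin hvrow]
            simp only [true_iff]
            exact Or.inr rfl
          · rw [pvGetVis_setVis_ne st.2.1 _ _ _ _ hab, inv.vis a b ha hb]
            have hne : (a, b) ≠ c₀ := by
              intro h; rw [hc₀def] at h
              exact hab ⟨congrArg Prod.fst h.symm, congrArg Prod.snd h.symm⟩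
            constructor
            · intro h; exact Or.inl h
            · rintro (h | h)
              · exact h
              · exact absurd h hne
        · simp [(pvShape_setCell st.1 _ _ _).1, inv.mlen]
        · intro a; rw [(pvShape_setCell st.1 _ _ _).2 a]; exact inv.mrow a
        · intro c hc
          rw [Set.mem_singleton_iff] at hc; subst hc
          exact pvGetCell_setCell_self st.1 _ _ _ hmin hmrow
        · intro a b hab
          have hne : ¬(i.toNat = a ∧ j.toNat = b) := by
            rintro ⟨rfl, rfl⟩; exact hab rfl
          exact pvGetCell_setCell_ne st.1 _ _ _ _ _ hne
        · intro p hp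
          simp at hp; subst hp
          exact ⟨hi, hiN, hj, hjN, rfl⟩
        · intro c hc
          rw [Set.mem_singleton_iff] at hc; subst hc
          exact Relation.ReflTransGen.refl
      have hclosed0 : ∀ c ∈ ({c₀} : Set (Nat × Nat)),
          (∀ p ∈ [((i : Int), (j : Int))], (p.1.toNat, p.2.toNat) ≠ c) →
          ∀ d, pvAdj orig n c d → d ∈ ({c₀} : Set (Nat × Nat)) := by
        intro c hc hq d _
        rw [Set.mem_singleton_iff] at hc; subst hc
        exact absurd rfl (hq ((i : Int), (j : Int)) (by simp))
      have out := pvBfs_correct orig N n st.2.2 c₀ P (fun a b => pvGetCell st.1 a b)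
        hn holen horow hland hP hM₀
        (pvCountFalse (pvSetVis st.2.1 i.toNat j.toNat) + 1)
        (pvSetCell st.1 i.toNat j.toNat st.2.2) (pvSetVis st.2.1 i.toNat j.toNat)
        [(i, j)] {c₀} inv0 hclosed0 rfl (by simp)
      -- membership characterisation at t + 1
      have hchar : ∀ c : Nat × Nat, (pvLand orig n c ∧ pvRootRm orig n c < t + 1) ↔
          ((c ∈ P) ∨ pvConn orig n c₀ c) := by
        intro c
        constructor
        · rintro ⟨hcl, hclt⟩
          rcases Nat.lt_succ_iff_lt_or_eq.mp hclt with h | h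
          · exact Or.inl ⟨hcl, h⟩
          · right
            obtain ⟨hrl, hrc, hrrm⟩ := pvRoot_spec hcl
            have : pvRoot orig n c = c₀ := pvRm_inj hrl.2.1 hc2 (by rw [hrrm, h])
            exact (pvRoot_eq_iff hcl hroot).mp this
        · rintro (⟨hcl, hclt⟩ | hconn)
          · exact ⟨hcl, by omega⟩
          · have hcl := pvConn_land hland hconn
            refine ⟨hcl, ?_⟩
            rw [← pvRootRm_congr hconn]
            omega
      rw [hstep]
      refine ⟨out.vlen, out.vrow, ?_, out.mlen, out.mrow, ?_, ?_, ?_⟩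
      · intro a b ha hb
        rw [out.vis a b ha hb, ← hchar (a, b)]
      · intro c hcl hclt
        rcases (hchar c).mp ⟨hcl, hclt⟩ with hP' | hconn
        · have hnconn : ¬ pvConn orig n c₀ c := hP c hP'
          have := out.mBg c.1 c.2 (by simpa using hnconn)
          simp at this
          rw [this]
          exact inv.mLab c hP'.1 hP'.2
        · rw [out.mConn c hconn, inv.idv]
          unfold pvLabel
          rw [pvRootRm_congr (pvConn_symm hconn), hrmeq]
      · intro a b hcond
        rw [(hchar (a, b)).not] at hcond
        push_neg at hcond
        rw [out.mBg a b hcond.2]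
        exact hM₀ a b hcond.1
      · simp only
        rw [inv.idv]
        have hins : pvRootsBelow orig n (t + 1) = insert c₀ (pvRootsBelow orig n t) := by
          ext c
          simp only [pvRootsBelow, Set.mem_setOf_eq, Set.mem_insert_iff]
          constructor
          · rintro ⟨hr, hlt⟩
            rcases Nat.lt_succ_iff_lt_or_eq.mp hlt with h | h
            · exact Or.inr ⟨hr, h⟩
            · left
              exact pvRm_inj hr.1.2.1 hc2 h
          · rintro (rfl | ⟨hr, hlt⟩)
            · exact ⟨hroot, by omega⟩
            · exact ⟨hr, by omega⟩
        rw [hins, Set.ncard_insert_of_notMem (by rintro ⟨_, h⟩; omega)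
          (pvRootsBelow_finite orig n t)]
        push_cast
        ring
  · -- not a land cell: skip
    have hcell : pvGetCell st.1 i.toNat j.toNat ≠ 1 := by
      rw [inv.mBg i.toNat j.toNat (by rintro ⟨h1, _⟩; exact hland h1)]
      intro h
      exact hland ⟨hc1, hc2, h⟩
    have hstep : pvStepCell N st i j = st := by
      unfold pvStepCell
      rw [if_neg]; rintro ⟨hf, _⟩; exact hcell hf
    rw [hstep]
    have hno : ∀ c : Nat × Nat, pvLand orig n c → pvRootRm orig n c ≠ t := by
      intro c hc hrm
      obtain ⟨hrl, hrc, hrrm⟩ := pvRoot_spec hc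
      have : pvRoot orig n c = c₀ := pvRm_inj hrl.2.1 hc2 (by rw [hrrm, hrm])
      exact hland (this ▸ hrl)
    have hnoroot : ∀ r, pvIsRoot orig n r → pvRm n r ≠ t := by
      intro r hr hrm
      have : pvRootRm orig n r = pvRm n r := by
        conv_rhs => rw [← hr.2]
        rw [(pvRoot_spec hr.1).2.2]
      exact hno r hr.1 (by omega)
    refine ⟨inv.vlen, inv.vrow, ?_, inv.mlen, inv.mrow, ?_, ?_, ?_⟩
    · intro a b ha hb
      rw [inv.vis a b ha hb]
      constructor
      · rintro ⟨h1, h2⟩; exact ⟨h1, by omega⟩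
      · rintro ⟨h1, h2⟩; exact ⟨h1, by have := hno _ h1; omega⟩
    · intro c hc hlt
      exact inv.mLab c hc (by have := hno _ hc; omega)
    · intro a b hcond
      apply inv.mBg
      rintro ⟨h1, h2⟩; exact hcond ⟨h1, by omega⟩
    · rw [inv.idv, pvRootsBelow_succ_of_no_root orig n t hnoroot]

theorem pvRow_fold (orig : List (List Int)) (N : Int) (n : Nat)
    (hn : n = N.toNat)
    (holen : n ≤ orig.length) (horow : ∀ a, a < n → n ≤ (orig.getD a []).length)
    (i : Int) (hi : 0 ≤ i) (hiN : i < N) :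
    ∀ (k : Nat) (j0 : Int), 0 ≤ j0 → j0 ≤ N → k = (N - j0).toNat →
    ∀ st, PvOuterInv orig N n (i.toNat * n + j0.toNat) st →
    PvOuterInv orig N n (i.toNat * n + n)
      ((PySem.List.pyRange j0 N 1).foldl (fun st' j => pvStepCell N st' i j) st) := by
  intro k
  induction k with
  | zero =>
    intro j0 h0 hN hk st inv
    rw [PySem.List.pyRange_one_eq_nil (by omega : N ≤ j0), List.foldl_nil]
    have hj : j0.toNat = n := by omega
    rwa [hj] at inv
  | succ k ih =>
    intro j0 h0 hN hk st inv
    have hj0N : j0 < N := by omega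
    rw [PySem.List.pyRange_one_cons hj0N, List.foldl_cons]
    have hstep := pvStepCell_correct orig N n hn holen horow i j0 hi hiN h0 hj0N st
      (by simpa [pvRm] using inv)
    have := ih (j0 + 1) (by omega) (by omega) (by omega) (pvStepCell N st i j0)
      (by
        have h1 : (j0 + 1).toNat = j0.toNat + 1 := by omega
        rw [h1]
        simpa [pvRm] using hstep)
    exact this

theorem pvGrid_fold (orig : List (List Int)) (N : Int) (n : Nat)
    (hn : n = N.toNat)
    (holen : n ≤ orig.length) (horow : ∀ a, a < n → n ≤ (orig.getD a []).length) :
    ∀ (k : Nat) (i0 : Int), 0 ≤ i0 → i0 ≤ N → k = (N - i0).toNat →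
    ∀ st, PvOuterInv orig N n (i0.toNat * n) st →
    PvOuterInv orig N n (n * n)
      ((PySem.List.pyRange i0 N 1).foldl
        (fun st i => (PySem.List.pyRange 0 N 1).foldl (fun st' j => pvStepCell N st' i j) st) st) := by
  intro k
  induction k with
  | zero =>
    intro i0 h0 hN hk st inv
    rw [PySem.List.pyRange_one_eq_nil (by omega : N ≤ i0), List.foldl_nil]
    have hi : i0.toNat * n = n * n := by
      have h2 : i0.toNat = n := by omega
      rw [h2]
    rwa [hi] at inv
  | succ k ih =>
    intro i0 h0 hN hk st inv
    have hi0N : i0 < N := by omega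
    rw [PySem.List.pyRange_one_cons hi0N, List.foldl_cons]
    have hrow := pvRow_fold orig N n hn holen horow i0 h0 hi0N (N.toNat) 0 (by omega)
      (by omega) (by omega) st (by simpa using inv)
    exact ih (i0 + 1) (by omega) (by omega) (by omega) _
      (by
        have h1 : (i0 + 1).toNat * n = i0.toNat * n + n := by
          have : (i0 + 1).toNat = i0.toNat + 1 := by omega
          rw [this]; ring
        rw [h1]
        exact hrow)

theorem pvInit_inv (orig : List (List Int)) (N : Int) (n : Nat) (hn : n = N.toNat) :
    PvOuterInv orig N n 0
      (orig, List.replicate n (List.replicate n false), 2) := by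
  constructor
  · simp
  · intro a ha; simp [List.getD_eq_getElem?_getD, List.getElem?_replicate, ha]
  · intro a b ha hb
    rw [pvGetVis_replicate n a b ha hb]
    simp
  · rfl
  · intro a; rfl
  · intro c _ h; omega
  · intro a b _; rfl
  · have : pvRootsBelow orig n 0 = ∅ := by
      ext c; simp [pvRootsBelow]
    simp [this]

-- common shape of both programs' results
structure PvResult (orig : List (List Int)) (n : Nat) (out : List (List Int) × Int) : Prop where
  mlen : out.1.length = orig.length
  mrow : ∀ a, (out.1.getD a []).length = (orig.getD a []).length
  mLab : ∀ c : Nat × Nat, pvLand orig n c → pvGetCell out.1 c.1 c.2 = pvLabel orig n c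
  mBg : ∀ a b, ¬ pvLand orig n (a, b) → pvGetCell out.1 a b = pvGetCell orig a b
  cnt : out.2 = 1 + ((pvRootsBelow orig n (n * n)).ncard : Int)

theorem pvPre_len (maps : List (List Int)) (N : Int) (hpre : Pre_label_islands maps N) :
    N.toNat ≤ maps.length := by
  have := hpre.1; omega

theorem pvPre_row (maps : List (List Int)) (N : Int) (hpre : Pre_label_islands maps N) :
    ∀ a, a < N.toNat → N.toNat ≤ (maps.getD a []).length := by
  intro a ha
  have hlen : N.toNat ≤ maps.length := pvPre_len maps N hpre
  have hmem : maps.getD a [] ∈ maps.take N.toNat := by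
    have ha' : a < maps.length := by omega
    have h1 : maps.getD a [] = maps[a] := by
      simp [List.getD_eq_getElem?_getD, List.getElem?_eq_getElem ha']
    have h2 : a < (maps.take N.toNat).length := by simp; omega
    have h3 : (maps.take N.toNat)[a] = maps[a] := List.getElem_take
    rw [h1, ← h3]
    exact List.getElem_mem h2
  have := hpre.2 _ hmem
  omega

theorem pvEmpty_rootsBelow (orig : List (List Int)) (t : Nat) :
    pvRootsBelow orig 0 t = ∅ := by
  ext c
  simp only [pvRootsBelow, Set.mem_setOf_eq, Set.mem_empty_iff_false, iff_false]
  rintro ⟨⟨⟨h, _⟩, _⟩, _⟩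
  omega

theorem label_islands_A_char (maps : List (List Int)) (N : Int)
    (hpre : Pre_label_islands maps N) :
    PvResult maps N.toNat (label_islands maps N) := by
  by_cases hN : N ≤ 0
  · have hn0 : N.toNat = 0 := by omega
    have : label_islands maps N = (maps, 1) := by
      unfold label_islands
      rw [PySem.List.pyRange_one_eq_nil (by omega : N ≤ 0)]
      rfl
    rw [this]
    refine ⟨rfl, fun a => rfl, ?_, fun a b _ => rfl, ?_⟩
    · rintro ⟨a, b⟩ ⟨h1, _, _⟩; omega
    · rw [hn0]; simp [pvEmpty_rootsBelow]
  · push_neg at hN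
    have hfin := pvGrid_fold maps N N.toNat rfl (pvPre_len maps N hpre) (pvPre_row maps N hpre)
      N.toNat 0 (le_refl 0) (by omega) (by omega)
      (maps, List.replicate N.toNat (List.replicate N.toNat false), 2)
      (by simpa using pvInit_inv maps N N.toNat rfl)
    set stF := (PySem.List.pyRange 0 N 1).foldl
      (fun st i => (PySem.List.pyRange 0 N 1).foldl (fun st' j => pvStepCell N st' i j) st)
      (maps, List.replicate N.toNat (List.replicate N.toNat false), 2) with hstF
    have hout : label_islands maps N = (stF.1, stF.2.2 - 1) := by
      rw [hstF]
      rfl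
    rw [hout]
    refine ⟨hfin.mlen, hfin.mrow, ?_, ?_, ?_⟩
    · intro c hc
      apply hfin.mLab c hc
      have h1 := pvRootRm_le hc Relation.ReflTransGen.refl
      have h2 := pvRm_lt hc.1 hc.2.1
      omega
    · intro a b hnl
      exact hfin.mBg a b (fun h => hnl h.1)
    · simp only
      rw [hfin.idv]
      ring

-- ============ B-side: union-find core ============
-- parent entries are nonnegative and never point upward
def pvParentOk (parent : List Int) : Prop :=
  ∀ k : Nat, ∃ m : Nat, parent.getD k (Int.ofNat k) = Int.ofNat m ∧ m ≤ k

theorem pvUfFind_succ (parent : List Int) (f k : Nat) :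
    pvUfFind parent (f + 1) k =
      if parent.getD k (Int.ofNat k) ≠ Int.ofNat k then
        pvUfFind parent f (parent.getD k (Int.ofNat k)).toNat
      else k := rfl

theorem pvUfFind_fuel (parent : List Int) (hok : pvParentOk parent) :
    ∀ (k fuel : Nat), k < fuel → pvUfFind parent fuel k = pvUfRoot parent k := by
  intro k
  induction k using Nat.strong_induction_on with
  | _ k ih =>
    intro fuel hfuel
    obtain ⟨m, hm, hmk⟩ := hok k
    obtain ⟨f, rfl⟩ : ∃ f, fuel = f + 1 := ⟨fuel - 1, by omega⟩
    by_cases hmek : m = k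
    · subst hmek
      unfold pvUfRoot
      rw [pvUfFind_succ, pvUfFind_succ, hm]
      simp
    · have hmk' : m < k := by omega
      have h1 : pvUfFind parent (f + 1) k = pvUfFind parent f m := by
        rw [pvUfFind_succ, hm, if_pos (by simp [Int.ofNat_inj]; omega)]
        simp
      have h2 : pvUfRoot parent k = pvUfFind parent k m := by
        unfold pvUfRoot
        rw [pvUfFind_succ, hm, if_pos (by simp [Int.ofNat_inj]; omega)]
        simp
      rw [h1, h2, ih m hmk' f (by omega), ih m hmk' k hmk']

theorem pvUfRoot_fix (parent : List Int) (k : Nat)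
    (h : parent.getD k (Int.ofNat k) = Int.ofNat k) : pvUfRoot parent k = k := by
  rw [pvUfRoot, pvUfFind_succ, h]
  simp

theorem pvUfRoot_unfold (parent : List Int) (hok : pvParentOk parent) (k m : Nat)
    (hm : parent.getD k (Int.ofNat k) = Int.ofNat m) (hlt : m < k) :
    pvUfRoot parent k = pvUfRoot parent m := by
  have h2 : pvUfRoot parent k = pvUfFind parent k m := by
    unfold pvUfRoot
    rw [pvUfFind_succ, hm, if_pos (by simp [Int.ofNat_inj]; omega)]
    simp
  rw [h2, pvUfFind_fuel parent hok m k hlt]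

theorem pvUfRoot_le (parent : List Int) (hok : pvParentOk parent) (k : Nat) :
    pvUfRoot parent k ≤ k := by
  induction k using Nat.strong_induction_on with
  | _ k ih =>
    obtain ⟨m, hm, hmk⟩ := hok k
    by_cases hmek : m = k
    · rw [hmek] at hm
      rw [pvUfRoot_fix parent k hm]
    · have hmk' : m < k := by omega
      rw [pvUfRoot_unfold parent hok k m hm hmk']
      have := ih m hmk'
      omega

theorem pvUfRoot_isFix (parent : List Int) (hok : pvParentOk parent) (k : Nat) :
    parent.getD (pvUfRoot parent k) (Int.ofNat (pvUfRoot parent k)) =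
      Int.ofNat (pvUfRoot parent k) := by
  induction k using Nat.strong_induction_on with
  | _ k ih =>
    obtain ⟨m, hm, hmk⟩ := hok k
    by_cases hmek : m = k
    · rw [hmek] at hm
      rw [pvUfRoot_fix parent k hm]; exact hm
    · have hmk' : m < k := by omega
      rw [pvUfRoot_unfold parent hok k m hm hmk']
      exact ih m hmk'

theorem pvGetD_set (parent : List Int) (a : Nat) (v : Int) (k : Nat) (d : Int) :
    (parent.set a v).getD k d =
      if k = a ∧ a < parent.length then v else parent.getD k d := by
  by_cases hka : k = a ∧ a < parent.length
  · obtain ⟨rfl, ha⟩ := hka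
    simp [List.getD_eq_getElem?_getD, List.getElem?_set, ha]
  · by_cases hk : k = a
    · subst hk
      have ha : ¬ k < parent.length := fun h => hka ⟨rfl, h⟩
      simp [List.getD_eq_getElem?_getD, List.getElem?_set, hka, ha]
    · simp [List.getD_eq_getElem?_getD, List.getElem?_set, hka, hk, Ne.symm hk]

theorem pvParentOk_set (parent : List Int) (hok : pvParentOk parent) (a b : Nat)
    (hba : b ≤ a) : pvParentOk (parent.set a (Int.ofNat b)) := by
  intro k
  rw [pvGetD_set]
  by_cases hka : k = a ∧ a < parent.length
  · rw [if_pos hka]; exact ⟨b, rfl, by omega⟩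
  · rw [if_neg hka]; exact hok k

theorem pvUfRoot_set (parent : List Int) (hok : pvParentOk parent) (a b : Nat)
    (ha : parent.getD a (Int.ofNat a) = Int.ofNat a)
    (hb : parent.getD b (Int.ofNat b) = Int.ofNat b)
    (hba : b < a) (haLen : a < parent.length) :
    ∀ k, pvUfRoot (parent.set a (Int.ofNat b)) k =
      if pvUfRoot parent k = a then b else pvUfRoot parent k := by
  have hok' : pvParentOk (parent.set a (Int.ofNat b)) := pvParentOk_set parent hok a b (by omega)
  intro k
  induction k using Nat.strong_induction_on with
  | _ k ih =>
    by_cases hka : k = a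
    · subst hka
      have hent : (parent.set k (Int.ofNat b)).getD k (Int.ofNat k) = Int.ofNat b := by
        rw [pvGetD_set, if_pos ⟨rfl, haLen⟩]
      rw [pvUfRoot_unfold _ hok' k b hent hba, ih b hba]
      rw [pvUfRoot_fix parent k ha, pvUfRoot_fix parent b hb]
      simp [if_pos rfl, if_neg (by omega : ¬ b = k)]
    · obtain ⟨m, hm, hmk⟩ := hok k
      have hent : (parent.set a (Int.ofNat b)).getD k (Int.ofNat k) = Int.ofNat m := by
        rw [pvGetD_set, if_neg (by tauto)]
        exact hm
      by_cases hmek : m = k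
      · subst hmek
        rw [pvUfRoot_fix _ _ hent, pvUfRoot_fix parent _ hm, if_neg hka]
      · have hmk' : m < k := by omega
        rw [pvUfRoot_unfold _ hok' k m hent hmk', ih m hmk',
          pvUfRoot_unfold parent hok k m hm hmk']

-- ============ B-side: merging equivalence classes ============
def pvEquivOn (R : Nat × Nat → Nat × Nat → Prop) : Prop :=
  (∀ x, R x x) ∧ (∀ x y, R x y → R y x) ∧ (∀ x y z, R x y → R y z → R x z)

def pvJoin (R : Nat × Nat → Nat × Nat → Prop) (a b : Nat × Nat) (x y : Nat × Nat) : Prop :=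
  R x y ∨ (R x a ∧ R b y) ∨ (R x b ∧ R a y)

theorem pvJoin_equiv {R} (hR : pvEquivOn R) (a b : Nat × Nat) : pvEquivOn (pvJoin R a b) := by
  obtain ⟨hrefl, hsymm, htrans⟩ := hR
  refine ⟨fun x => Or.inl (hrefl x), ?_, ?_⟩
  · rintro x y (h | ⟨h1, h2⟩ | ⟨h1, h2⟩)
    · exact Or.inl (hsymm _ _ h)
    · exact Or.inr (Or.inr ⟨hsymm _ _ h2, hsymm _ _ h1⟩)
    · exact Or.inr (Or.inl ⟨hsymm _ _ h2, hsymm _ _ h1⟩)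
  · rintro x y z (h | ⟨h1, h2⟩ | ⟨h1, h2⟩) (g | ⟨g1, g2⟩ | ⟨g1, g2⟩)
    · exact Or.inl (htrans _ _ _ h g)
    · exact Or.inr (Or.inl ⟨htrans _ _ _ h g1, g2⟩)
    · exact Or.inr (Or.inr ⟨htrans _ _ _ h g1, g2⟩)
    · exact Or.inr (Or.inl ⟨h1, htrans _ _ _ h2 g⟩)
    · exact Or.inl (htrans _ _ _ h1 (htrans _ _ _ (hsymm _ _ (htrans _ _ _ h2 g1)) g2))
    · exact Or.inl (htrans _ _ _ h1 g2)
    · exact Or.inr (Or.inr ⟨h1, htrans _ _ _ h2 g⟩)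
    · exact Or.inl (htrans _ _ _ h1 g2)
    · exact Or.inr (Or.inr ⟨h1, g2⟩)

-- the reflexive-transitive closure of a generator enlarged by one symmetric pair
theorem pvRTG_join (r : Nat × Nat → Nat × Nat → Prop) (a b : Nat × Nat) (x y : Nat × Nat) :
    Relation.ReflTransGen (fun u v => r u v ∨ (u = a ∧ v = b) ∨ (u = b ∧ v = a)) x y ↔
      pvJoin (Relation.ReflTransGen r) a b x y := by
  constructor
  · intro h
    induction h with
    | refl => exact Or.inl Relation.ReflTransGen.refl
    | tail hp hstep ih =>
      rcases hstep with hs | ⟨rfl, rfl⟩ | ⟨rfl, rfl⟩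
      · rcases ih with h | ⟨h1, h2⟩ | ⟨h1, h2⟩
        · exact Or.inl (h.tail hs)
        · exact Or.inr (Or.inl ⟨h1, h2.tail hs⟩)
        · exact Or.inr (Or.inr ⟨h1, h2.tail hs⟩)
      · rcases ih with h | ⟨h1, h2⟩ | ⟨h1, h2⟩
        · exact Or.inr (Or.inl ⟨h, Relation.ReflTransGen.refl⟩)
        · exact Or.inr (Or.inl ⟨h1, Relation.ReflTransGen.refl⟩)
        · exact Or.inl h1
      · rcases ih with h | ⟨h1, h2⟩ | ⟨h1, h2⟩
        · exact Or.inr (Or.inr ⟨h, Relation.ReflTransGen.refl⟩)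
        · exact Or.inl h1
        · exact Or.inr (Or.inr ⟨h1, Relation.ReflTransGen.refl⟩)
  · have hmono : ∀ u v, Relation.ReflTransGen r u v →
        Relation.ReflTransGen (fun u v => r u v ∨ (u = a ∧ v = b) ∨ (u = b ∧ v = a)) u v := by
      intro u v h
      exact Relation.ReflTransGen.mono (fun _ _ hr => Or.inl hr) h
    rintro (h | ⟨h1, h2⟩ | ⟨h1, h2⟩)
    · exact hmono _ _ h
    · exact ((hmono _ _ h1).tail (Or.inr (Or.inl ⟨rfl, rfl⟩))).trans (hmono _ _ h2)
    · exact ((hmono _ _ h1).tail (Or.inr (Or.inr ⟨rfl, rfl⟩))).trans (hmono _ _ h2)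

-- the row-major first cell of c's R-class
noncomputable def pvMinOf (n : Nat) (R : Nat × Nat → Nat × Nat → Prop) (c : Nat × Nat) : Nat :=
  sInf {k | ∃ d : Nat × Nat, R c d ∧ d.1 < n ∧ d.2 < n ∧ pvRm n d = k}

theorem pvMinOf_spec {n R} (hrefl : ∀ x, R x x) {c : Nat × Nat} (hc1 : c.1 < n) (hc2 : c.2 < n) :
    ∃ d : Nat × Nat, R c d ∧ d.1 < n ∧ d.2 < n ∧ pvRm n d = pvMinOf n R c :=
  Nat.sInf_mem (⟨pvRm n c, c, hrefl c, hc1, hc2, rfl⟩ :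
    {k | ∃ d : Nat × Nat, R c d ∧ d.1 < n ∧ d.2 < n ∧ pvRm n d = k}.Nonempty)

theorem pvMinOf_le {n R} {c d : Nat × Nat} (h : R c d) (hd1 : d.1 < n) (hd2 : d.2 < n) :
    pvMinOf n R c ≤ pvRm n d := Nat.sInf_le ⟨d, h, hd1, hd2, rfl⟩

theorem pvMinOf_eq_of_rel {n R} (hR : pvEquivOn R) {c d : Nat × Nat} (h : R c d) :
    pvMinOf n R c = pvMinOf n R d := by
  obtain ⟨_, hsymm, htrans⟩ := hR
  unfold pvMinOf
  congr 1
  ext k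
  constructor
  · rintro ⟨e, he, h1, h2, rfl⟩; exact ⟨e, htrans _ _ _ (hsymm _ _ h) he, h1, h2, rfl⟩
  · rintro ⟨e, he, h1, h2, rfl⟩; exact ⟨e, htrans _ _ _ h he, h1, h2, rfl⟩

theorem pvRel_of_minOf_eq {n R} (hR : pvEquivOn R) {c d : Nat × Nat}
    (hc1 : c.1 < n) (hc2 : c.2 < n) (hd1 : d.1 < n) (hd2 : d.2 < n)
    (h : pvMinOf n R c = pvMinOf n R d) : R c d := by
  obtain ⟨hrefl, hsymm, htrans⟩ := hR
  obtain ⟨e1, he1, h11, h12, hrm1⟩ := pvMinOf_spec hrefl hc1 hc2 (R := R)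
  obtain ⟨e2, he2, h21, h22, hrm2⟩ := pvMinOf_spec hrefl hd1 hd2 (R := R)
  have : e1 = e2 := pvRm_inj h12 h22 (by rw [hrm1, hrm2, h])
  subst this
  exact htrans _ _ _ he1 (hsymm _ _ he2)

theorem pvMinOf_congr_at {n} {R R' : Nat × Nat → Nat × Nat → Prop} {c : Nat × Nat}
    (h : ∀ d, R c d ↔ R' c d) : pvMinOf n R c = pvMinOf n R' c := by
  unfold pvMinOf
  congr 1
  ext k
  constructor
  · rintro ⟨d, hd, h1, h2, rfl⟩; exact ⟨d, (h d).mp hd, h1, h2, rfl⟩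
  · rintro ⟨d, hd, h1, h2, rfl⟩; exact ⟨d, (h d).mpr hd, h1, h2, rfl⟩

theorem pvJoin_comm {R} (hR : pvEquivOn R) (a b x y : Nat × Nat) :
    pvJoin R a b x y ↔ pvJoin R b a x y := by
  unfold pvJoin
  tauto

theorem pvUnion_set (n : Nat) (parent : List Int) (R : Nat × Nat → Nat × Nat → Prop)
    (hR : pvEquivOn R) (hlen : parent.length = n * n) (hok : pvParentOk parent)
    (hagree : ∀ c : Nat × Nat, c.1 < n → c.2 < n → pvUfRoot parent (pvRm n c) = pvMinOf n R c)
    (u w : Nat × Nat) (hu1 : u.1 < n) (hu2 : u.2 < n) (hw1 : w.1 < n) (hw2 : w.2 < n)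
    (hlt : pvUfRoot parent (pvRm n w) < pvUfRoot parent (pvRm n u)) :
    (parent.set (pvUfRoot parent (pvRm n u)) (Int.ofNat (pvUfRoot parent (pvRm n w)))).length
        = n * n ∧
    pvParentOk (parent.set (pvUfRoot parent (pvRm n u))
        (Int.ofNat (pvUfRoot parent (pvRm n w)))) ∧
    ∀ c : Nat × Nat, c.1 < n → c.2 < n →
      pvUfRoot (parent.set (pvUfRoot parent (pvRm n u))
          (Int.ofNat (pvUfRoot parent (pvRm n w)))) (pvRm n c)
        = pvMinOf n (pvJoin R u w) c := by
  obtain ⟨hrefl, hsymm, htrans⟩ := hR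
  have hjrefl : ∀ x, pvJoin R u w x x := fun x => Or.inl (hrefl x)
  set rU := pvUfRoot parent (pvRm n u) with hrU
  set rW := pvUfRoot parent (pvRm n w) with hrW
  have hruLen : rU < parent.length := by
    have h1 := pvUfRoot_le parent hok (pvRm n u)
    have h2 := pvRm_lt hu1 hu2
    omega
  have hfixu : parent.getD rU (Int.ofNat rU) = Int.ofNat rU := pvUfRoot_isFix parent hok _
  have hfixw : parent.getD rW (Int.ofNat rW) = Int.ofNat rW := pvUfRoot_isFix parent hok _
  have hset := pvUfRoot_set parent hok rU rW hfixu hfixw hlt hruLen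
  have hminu : pvMinOf n R u = rU := (hagree u hu1 hu2).symm
  have hminw : pvMinOf n R w = rW := (hagree w hw1 hw2).symm
  obtain ⟨ew, hew, hew1, hew2, hewrm⟩ := pvMinOf_spec (R := R) hrefl hw1 hw2
  refine ⟨by simp [hlen], pvParentOk_set parent hok rU rW (by omega), ?_⟩
  intro c hc1 hc2
  rw [hset (pvRm n c), hagree c hc1 hc2]
  -- lower bound for the merged class, valid in all cases
  have hlow : ∀ d0 : Nat × Nat, pvJoin R u w c d0 → d0.1 < n → d0.2 < n →
      (R c u ∨ R c w) → rW ≤ pvRm n d0 := by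
    rintro d0 hj hd01 hd02 hcuw
    rcases hj with h | ⟨h1, h2⟩ | ⟨h1, h2⟩
    · rcases hcuw with hcu | hcw
      · have : R u d0 := htrans _ _ _ (hsymm _ _ hcu) h
        have := pvMinOf_le (n := n) this hd01 hd02
        omega
      · have : R w d0 := htrans _ _ _ (hsymm _ _ hcw) h
        have := pvMinOf_le (n := n) this hd01 hd02
        omega
    · have := pvMinOf_le (n := n) h2 hd01 hd02
      omega
    · have := pvMinOf_le (n := n) h2 hd01 hd02
      omega
  by_cases hcu : R c u
  · have hceq : pvMinOf n R c = rU := by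
      rw [pvMinOf_eq_of_rel ⟨hrefl, hsymm, htrans⟩ hcu, hminu]
    rw [if_pos hceq]
    apply le_antisymm
    · obtain ⟨d0, hd0, hd01, hd02, hd0rm⟩ := pvMinOf_spec (R := pvJoin R u w) hjrefl hc1 hc2
      rw [← hd0rm]
      exact hlow d0 hd0 hd01 hd02 (Or.inl hcu)
    · have hj : pvJoin R u w c ew := Or.inr (Or.inl ⟨hcu, hew⟩)
      have := pvMinOf_le (n := n) hj hew1 hew2
      omega
  · by_cases hcw : R c w
    · have hceq : pvMinOf n R c = rW := by
        rw [pvMinOf_eq_of_rel ⟨hrefl, hsymm, htrans⟩ hcw, hminw]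
      rw [if_neg (by omega)]
      rw [hceq]
      apply le_antisymm
      · obtain ⟨d0, hd0, hd01, hd02, hd0rm⟩ := pvMinOf_spec (R := pvJoin R u w) hjrefl hc1 hc2
        rw [← hd0rm]
        exact hlow d0 hd0 hd01 hd02 (Or.inr hcw)
      · have hj : pvJoin R u w c ew := Or.inl (htrans _ _ _ hcw hew)
        have := pvMinOf_le (n := n) hj hew1 hew2
        omega
    · have hcne : pvMinOf n R c ≠ rU := by
        intro h
        exact hcu (pvRel_of_minOf_eq ⟨hrefl, hsymm, htrans⟩ hc1 hc2 hu1 hu2 (by rw [h, hminu]))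
      rw [if_neg hcne]
      apply pvMinOf_congr_at
      intro d
      constructor
      · intro h; exact Or.inl h
      · rintro (h | ⟨h1, h2⟩ | ⟨h1, h2⟩)
        · exact h
        · exact absurd h1 hcu
        · exact absurd h1 hcw

-- the exact shape of B's inner union code
theorem pvUnion_correct (n : Nat) (parent : List Int) (R : Nat × Nat → Nat × Nat → Prop)
    (hR : pvEquivOn R) (hlen : parent.length = n * n) (hok : pvParentOk parent)
    (hagree : ∀ c : Nat × Nat, c.1 < n → c.2 < n → pvUfRoot parent (pvRm n c) = pvMinOf n R c)
    (a b : Nat × Nat) (ha1 : a.1 < n) (ha2 : a.2 < n) (hb1 : b.1 < n) (hb2 : b.2 < n)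
    (parent' : List Int)
    (hp' : parent' =
      (if pvUfRoot parent (pvRm n a) ≠ pvUfRoot parent (pvRm n b) then
        (if pvUfRoot parent (pvRm n a) < pvUfRoot parent (pvRm n b) then
          parent.set (pvUfRoot parent (pvRm n b)) (Int.ofNat (pvUfRoot parent (pvRm n a)))
        else
          parent.set (pvUfRoot parent (pvRm n a)) (Int.ofNat (pvUfRoot parent (pvRm n b))))
      else parent)) :
    parent'.length = n * n ∧ pvParentOk parent' ∧
      ∀ c : Nat × Nat, c.1 < n → c.2 < n →
        pvUfRoot parent' (pvRm n c) = pvMinOf n (pvJoin R a b) c := by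
  obtain ⟨hrefl, hsymm, htrans⟩ := hR
  by_cases hne : pvUfRoot parent (pvRm n a) ≠ pvUfRoot parent (pvRm n b)
  · rw [if_pos hne] at hp'
    by_cases hord : pvUfRoot parent (pvRm n a) < pvUfRoot parent (pvRm n b)
    · rw [if_pos hord] at hp'
      subst hp'
      have h := pvUnion_set n parent R ⟨hrefl, hsymm, htrans⟩ hlen hok hagree b a
        hb1 hb2 ha1 ha2 hord
      refine ⟨h.1, h.2.1, ?_⟩
      intro c hc1 hc2
      rw [h.2.2 c hc1 hc2]
      exact pvMinOf_congr_at (fun d => pvJoin_comm ⟨hrefl, hsymm, htrans⟩ b a c d)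
    · rw [if_neg hord] at hp'
      subst hp'
      exact pvUnion_set n parent R ⟨hrefl, hsymm, htrans⟩ hlen hok hagree a b
        ha1 ha2 hb1 hb2 (by omega)
  · rw [if_neg hne] at hp'
    subst hp'
    push_neg at hne
    have hab : R a b := pvRel_of_minOf_eq ⟨hrefl, hsymm, htrans⟩ ha1 ha2 hb1 hb2
      (by rw [← hagree a ha1 ha2, ← hagree b hb1 hb2, hne])
    refine ⟨hlen, hok, ?_⟩
    intro c hc1 hc2
    rw [hagree c hc1 hc2]
    apply pvMinOf_congr_at
    intro d
    constructor
    · intro h; exact Or.inl h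
    · rintro (h | ⟨h1, h2⟩ | ⟨h1, h2⟩)
      · exact h
      · exact htrans _ _ _ h1 (htrans _ _ _ hab h2)
      · exact htrans _ _ _ h1 (htrans _ _ _ (hsymm _ _ hab) h2)

-- ============ B-side: pass 1 over the grid ============
-- edges processed so far: cell c unites with its up and left land neighbours at time rm c
def pvEdge (orig : List (List Int)) (n t : Nat) (c d : Nat × Nat) : Prop :=
  pvLand orig n c ∧ pvLand orig n d ∧ pvRm n c < t ∧
    ((d.1 + 1 = c.1 ∧ d.2 = c.2) ∨ (d.1 = c.1 ∧ d.2 + 1 = c.2))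

def pvEGen (orig : List (List Int)) (n t : Nat) (u v : Nat × Nat) : Prop :=
  pvEdge orig n t u v ∨ pvEdge orig n t v u

def pvEConn (orig : List (List Int)) (n t : Nat) : Nat × Nat → Nat × Nat → Prop :=
  Relation.ReflTransGen (pvEGen orig n t)

theorem pvEConn_equiv (orig : List (List Int)) (n t : Nat) : pvEquivOn (pvEConn orig n t) := by
  refine ⟨fun x => Relation.ReflTransGen.refl, ?_, fun x y z h1 h2 => h1.trans h2⟩
  intro x y h
  exact Relation.ReflTransGen.symmetric
    (fun u v huv => by rcases huv with h | h; exact Or.inr h; exact Or.inl h) h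

theorem pvRTG_congr {r r' : Nat × Nat → Nat × Nat → Prop}
    (h : ∀ u v, r u v ↔ r' u v) (x y : Nat × Nat) :
    Relation.ReflTransGen r x y ↔ Relation.ReflTransGen r' x y :=
  ⟨Relation.ReflTransGen.mono (fun u v huv => (h u v).mp huv),
   Relation.ReflTransGen.mono (fun u v huv => (h u v).mpr huv)⟩

theorem pvEGen_succ (orig : List (List Int)) (n t : Nat) (c : Nat × Nat)
    (hc1 : c.1 < n) (hc2 : c.2 < n) (hrm : pvRm n c = t) :
    ∀ u v, pvEGen orig n (t + 1) u v ↔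
      (pvEGen orig n t u v ∨
       ((1 ≤ c.1 ∧ pvLand orig n c ∧ pvLand orig n (c.1 - 1, c.2)) ∧
         ((u = (c.1 - 1, c.2) ∧ v = c) ∨ (u = c ∧ v = (c.1 - 1, c.2)))) ∨
       ((1 ≤ c.2 ∧ pvLand orig n c ∧ pvLand orig n (c.1, c.2 - 1)) ∧
         ((u = (c.1, c.2 - 1) ∧ v = c) ∨ (u = c ∧ v = (c.1, c.2 - 1))))) := by
  intro u v
  have hedge : ∀ x y, pvEdge orig n (t + 1) x y ↔
      (pvEdge orig n t x y ∨
       (x = c ∧ pvLand orig n c ∧ pvLand orig n y ∧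
        ((y.1 + 1 = c.1 ∧ y.2 = c.2) ∨ (y.1 = c.1 ∧ y.2 + 1 = c.2)))) := by
    intro x y
    constructor
    · rintro ⟨hx, hy, hrmx, hshape⟩
      rcases Nat.lt_succ_iff_lt_or_eq.mp hrmx with h | h
      · exact Or.inl ⟨hx, hy, h, hshape⟩
      · have hxc : x = c := pvRm_inj hx.2.1 hc2 (by rw [h, hrm])
        subst hxc
        exact Or.inr ⟨rfl, hx, hy, hshape⟩
    · rintro (⟨hx, hy, hrmx, hshape⟩ | ⟨rfl, hc, hy, hshape⟩)
      · exact ⟨hx, hy, by omega, hshape⟩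
      · exact ⟨hc, hy, by omega, hshape⟩
  unfold pvEGen
  rw [hedge u v, hedge v u]
  constructor
  · rintro ((h | ⟨hxc, hc, hy, hsh | hsh⟩) | (h | ⟨hxc, hc, hy, hsh | hsh⟩))
    · exact Or.inl (Or.inl h)
    · have hv : v = (c.1 - 1, c.2) := by apply Prod.ext <;> simp <;> omega
      exact Or.inr (Or.inl ⟨⟨by omega, hc, hv ▸ hy⟩, Or.inr ⟨hxc, hv⟩⟩)
    · have hv : v = (c.1, c.2 - 1) := by apply Prod.ext <;> simp <;> omega
      exact Or.inr (Or.inr ⟨⟨by omega, hc, hv ▸ hy⟩, Or.inr ⟨hxc, hv⟩⟩)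
    · exact Or.inl (Or.inr h)
    · have hv : u = (c.1 - 1, c.2) := by apply Prod.ext <;> simp <;> omega
      exact Or.inr (Or.inl ⟨⟨by omega, hc, hv ▸ hy⟩, Or.inl ⟨hv, hxc⟩⟩)
    · have hv : u = (c.1, c.2 - 1) := by apply Prod.ext <;> simp <;> omega
      exact Or.inr (Or.inr ⟨⟨by omega, hc, hv ▸ hy⟩, Or.inl ⟨hv, hxc⟩⟩)
  · rintro (h | ⟨⟨hge, hc, hd⟩, ⟨rfl, rfl⟩ | ⟨rfl, rfl⟩⟩ | ⟨⟨hge, hc, hd⟩, ⟨rfl, rfl⟩ | ⟨rfl, rfl⟩⟩)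
    · rcases h with h | h
      · exact Or.inl (Or.inl h)
      · exact Or.inr (Or.inl h)
    · exact Or.inr (Or.inr ⟨rfl, hc, hd, Or.inl ⟨by omega, by simp⟩⟩)
    · exact Or.inl (Or.inr ⟨rfl, hc, hd, Or.inl ⟨by omega, by simp⟩⟩)
    · exact Or.inr (Or.inr ⟨rfl, hc, hd, Or.inr ⟨by simp, by omega⟩⟩)
    · exact Or.inl (Or.inr ⟨rfl, hc, hd, Or.inr ⟨by simp, by omega⟩⟩)

theorem pvJoin_congr {R R' : Nat × Nat → Nat × Nat → Prop} (h : ∀ x y, R x y ↔ R' x y)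
    (a b x y : Nat × Nat) : pvJoin R a b x y ↔ pvJoin R' a b x y := by
  unfold pvJoin
  rw [h x y, h x a, h b y, h x b, h a y]

theorem pvUnite_correct (orig : List (List Int)) (N : Int) (i j : Int)
    (hi : 0 ≤ i) (hiN : i < N) (hj : 0 ≤ j) (hjN : j < N)
    (parent : List Int) (hlen : parent.length = N.toNat * N.toNat) (hok : pvParentOk parent)
    (hagree : ∀ c : Nat × Nat, c.1 < N.toNat → c.2 < N.toNat →
      pvUfRoot parent (pvRm N.toNat c) =
        pvMinOf N.toNat (pvEConn orig N.toNat (pvRm N.toNat (i.toNat, j.toNat))) c) :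
    (pvUnite N orig parent i j).length = N.toNat * N.toNat ∧
    pvParentOk (pvUnite N orig parent i j) ∧
    ∀ c : Nat × Nat, c.1 < N.toNat → c.2 < N.toNat →
      pvUfRoot (pvUnite N orig parent i j) (pvRm N.toNat c)
        = pvMinOf N.toNat (pvEConn orig N.toNat (pvRm N.toNat (i.toNat, j.toNat) + 1)) c := by
  have hc01 : i.toNat < N.toNat := by omega
  have hc02 : j.toNat < N.toNat := by omega
  have hsucc := pvEGen_succ orig N.toNat (pvRm N.toNat (i.toNat, j.toNat))
    (i.toNat, j.toNat) hc01 hc02 rfl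
  simp only at hsucc
  by_cases hland : pvLand orig N.toNat (i.toNat, j.toNat)
  · -- the cell is land: its up and left edges are processed now
    have hcell : pvGetCell orig i.toNat j.toNat = 1 := hland.2.2
    have hstep : pvUnite N orig parent i j =
        (fun par (pij : Int × Int) =>
          if 0 ≤ pij.1 ∧ 0 ≤ pij.2 ∧ pvGetCell orig pij.1.toNat pij.2.toNat = 1 then
            let ra := pvUfRoot par (pij.1.toNat * N.toNat + pij.2.toNat)
            let rb := pvUfRoot par (i.toNat * N.toNat + j.toNat)
            if ra ≠ rb then
              if ra < rb then par.set rb (Int.ofNat ra) else par.set ra (Int.ofNat rb)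
            else par
          else par)
        ((fun par (pij : Int × Int) =>
          if 0 ≤ pij.1 ∧ 0 ≤ pij.2 ∧ pvGetCell orig pij.1.toNat pij.2.toNat = 1 then
            let ra := pvUfRoot par (pij.1.toNat * N.toNat + pij.2.toNat)
            let rb := pvUfRoot par (i.toNat * N.toNat + j.toNat)
            if ra ≠ rb then
              if ra < rb then par.set rb (Int.ofNat ra) else par.set ra (Int.ofNat rb)
            else par
          else par) parent (i - 1, j)) (i, j - 1) := by
      unfold pvUnite
      rw [if_pos hcell]
      simp only [List.foldl_cons, List.foldl_nil]
    -- first neighbour: the cell above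
    have step1 : ∃ (p1 : List Int) (R1 : Nat × Nat → Nat × Nat → Prop),
        p1 = (fun par (pij : Int × Int) =>
          if 0 ≤ pij.1 ∧ 0 ≤ pij.2 ∧ pvGetCell orig pij.1.toNat pij.2.toNat = 1 then
            let ra := pvUfRoot par (pij.1.toNat * N.toNat + pij.2.toNat)
            let rb := pvUfRoot par (i.toNat * N.toNat + j.toNat)
            if ra ≠ rb then
              if ra < rb then par.set rb (Int.ofNat ra) else par.set ra (Int.ofNat rb)
            else par
          else par) parent (i - 1, j) ∧
        pvEquivOn R1 ∧
        p1.length = N.toNat * N.toNat ∧ pvParentOk p1 ∧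
        (∀ c : Nat × Nat, c.1 < N.toNat → c.2 < N.toNat →
          pvUfRoot p1 (pvRm N.toNat c) = pvMinOf N.toNat R1 c) ∧
        (∀ u v, Relation.ReflTransGen
          (fun u' v' => pvEGen orig N.toNat (pvRm N.toNat (i.toNat, j.toNat)) u' v' ∨
            ((1 ≤ i.toNat ∧ pvLand orig N.toNat (i.toNat, j.toNat) ∧
              pvLand orig N.toNat (i.toNat - 1, j.toNat)) ∧
             ((u' = (i.toNat - 1, j.toNat) ∧ v' = (i.toNat, j.toNat)) ∨
              (u' = (i.toNat, j.toNat) ∧ v' = (i.toNat - 1, j.toNat))))) u v ↔ R1 u v) := by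
      by_cases hcond : 0 ≤ i - 1 ∧ 0 ≤ j ∧ pvGetCell orig (i - 1).toNat j.toNat = 1
      · have hi1 : 1 ≤ i := by omega
        have hd1 : (i - 1).toNat = i.toNat - 1 := by omega
        have hdland : pvLand orig N.toNat (i.toNat - 1, j.toNat) :=
          ⟨by omega, hc02, by rw [← hd1]; exact hcond.2.2⟩
        have hE : (1 ≤ i.toNat ∧ pvLand orig N.toNat (i.toNat, j.toNat) ∧
            pvLand orig N.toNat (i.toNat - 1, j.toNat)) := ⟨by omega, hland, hdland⟩
        have hun := pvUnion_correct N.toNat parent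
          (pvEConn orig N.toNat (pvRm N.toNat (i.toNat, j.toNat)))
          (pvEConn_equiv orig N.toNat _) hlen hok hagree
          (i.toNat - 1, j.toNat) (i.toNat, j.toNat)
          (show i.toNat - 1 < N.toNat by omega) hc02 hc01 hc02 _ rfl
        have hka : (i - 1).toNat * N.toNat + j.toNat = pvRm N.toNat (i.toNat - 1, j.toNat) := by
          simp [pvRm, hd1]
        refine ⟨_, pvJoin (pvEConn orig N.toNat (pvRm N.toNat (i.toNat, j.toNat)))
            (i.toNat - 1, j.toNat) (i.toNat, j.toNat), ?_, ?_, hun.1, hun.2.1, hun.2.2, ?_⟩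
        · simp only [if_pos hcond]
          rw [← hka]
          rfl
        · exact pvJoin_equiv (pvEConn_equiv orig N.toNat _) _ _
        · intro u v
          have hgen : ∀ u' v',
              (pvEGen orig N.toNat (pvRm N.toNat (i.toNat, j.toNat)) u' v' ∨
               ((1 ≤ i.toNat ∧ pvLand orig N.toNat (i.toNat, j.toNat) ∧
                 pvLand orig N.toNat (i.toNat - 1, j.toNat)) ∧
                ((u' = (i.toNat - 1, j.toNat) ∧ v' = (i.toNat, j.toNat)) ∨
                 (u' = (i.toNat, j.toNat) ∧ v' = (i.toNat - 1, j.toNat))))) ↔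
              (pvEGen orig N.toNat (pvRm N.toNat (i.toNat, j.toNat)) u' v' ∨
               ((u' = (i.toNat - 1, j.toNat) ∧ v' = (i.toNat, j.toNat)) ∨
                (u' = (i.toNat, j.toNat) ∧ v' = (i.toNat - 1, j.toNat)))) := by
            intro u' v'
            constructor
            · rintro (h | ⟨_, h⟩); exact Or.inl h; exact Or.inr h
            · rintro (h | h); exact Or.inl h; exact Or.inr ⟨hE, h⟩
          rw [pvRTG_congr hgen u v, pvRTG_join]
          rfl
      · have hnE : ¬(1 ≤ i.toNat ∧ pvLand orig N.toNat (i.toNat, j.toNat) ∧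
            pvLand orig N.toNat (i.toNat - 1, j.toNat)) := by
          rintro ⟨h1, _, hdl⟩
          apply hcond
          refine ⟨by omega, hj, ?_⟩
          rw [show (i - 1).toNat = i.toNat - 1 by omega]
          exact hdl.2.2
        refine ⟨parent, pvEConn orig N.toNat (pvRm N.toNat (i.toNat, j.toNat)),
          by simp only [if_neg hcond], pvEConn_equiv orig N.toNat _, hlen, hok, hagree, ?_⟩
        intro u v
        apply pvRTG_congr
        intro u' v'
        constructor
        · rintro (h | ⟨hE', _⟩); exact h; exact absurd hE' hnE
        · intro h; exact Or.inl h
    obtain ⟨p1, R1, hp1, hR1eq, hp1len, hp1ok, hp1agree, hR1iff⟩ := step1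
    -- second neighbour: the cell to the left
    have step2 : ∃ (p2 : List Int) (R2 : Nat × Nat → Nat × Nat → Prop),
        p2 = (fun par (pij : Int × Int) =>
          if 0 ≤ pij.1 ∧ 0 ≤ pij.2 ∧ pvGetCell orig pij.1.toNat pij.2.toNat = 1 then
            let ra := pvUfRoot par (pij.1.toNat * N.toNat + pij.2.toNat)
            let rb := pvUfRoot par (i.toNat * N.toNat + j.toNat)
            if ra ≠ rb then
              if ra < rb then par.set rb (Int.ofNat ra) else par.set ra (Int.ofNat rb)
            else par
          else par) p1 (i, j - 1) ∧
        pvEquivOn R2 ∧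
        p2.length = N.toNat * N.toNat ∧ pvParentOk p2 ∧
        (∀ c : Nat × Nat, c.1 < N.toNat → c.2 < N.toNat →
          pvUfRoot p2 (pvRm N.toNat c) = pvMinOf N.toNat R2 c) ∧
        (∀ u v, Relation.ReflTransGen
          (fun u' v' => ((pvEGen orig N.toNat (pvRm N.toNat (i.toNat, j.toNat)) u' v' ∨
            ((1 ≤ i.toNat ∧ pvLand orig N.toNat (i.toNat, j.toNat) ∧
              pvLand orig N.toNat (i.toNat - 1, j.toNat)) ∧
             ((u' = (i.toNat - 1, j.toNat) ∧ v' = (i.toNat, j.toNat)) ∨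
              (u' = (i.toNat, j.toNat) ∧ v' = (i.toNat - 1, j.toNat))))) ∨
            ((1 ≤ j.toNat ∧ pvLand orig N.toNat (i.toNat, j.toNat) ∧
              pvLand orig N.toNat (i.toNat, j.toNat - 1)) ∧
             ((u' = (i.toNat, j.toNat - 1) ∧ v' = (i.toNat, j.toNat)) ∨
              (u' = (i.toNat, j.toNat) ∧ v' = (i.toNat, j.toNat - 1)))))) u v ↔ R2 u v) := by
      by_cases hcond : 0 ≤ i ∧ 0 ≤ j - 1 ∧ pvGetCell orig i.toNat (j - 1).toNat = 1
      · have hj1 : 1 ≤ j := by omega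
        have hd1 : (j - 1).toNat = j.toNat - 1 := by omega
        have hdland : pvLand orig N.toNat (i.toNat, j.toNat - 1) :=
          ⟨hc01, by omega, by rw [← hd1]; exact hcond.2.2⟩
        have hE : (1 ≤ j.toNat ∧ pvLand orig N.toNat (i.toNat, j.toNat) ∧
            pvLand orig N.toNat (i.toNat, j.toNat - 1)) := ⟨by omega, hland, hdland⟩
        have hun := pvUnion_correct N.toNat p1 R1 hR1eq hp1len hp1ok hp1agree
          (i.toNat, j.toNat - 1) (i.toNat, j.toNat)
          hc01 (show j.toNat - 1 < N.toNat by omega) hc01 hc02 _ rfl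
        have hka : i.toNat * N.toNat + (j - 1).toNat = pvRm N.toNat (i.toNat, j.toNat - 1) := by
          simp [pvRm, hd1]
        refine ⟨_, pvJoin R1 (i.toNat, j.toNat - 1) (i.toNat, j.toNat),
          ?_, pvJoin_equiv hR1eq _ _, hun.1, hun.2.1, hun.2.2, ?_⟩
        · simp only [if_pos hcond]
          rw [← hka]
          rfl
        · intro u v
          have hgen : ∀ u' v',
              (((pvEGen orig N.toNat (pvRm N.toNat (i.toNat, j.toNat)) u' v' ∨
            ((1 ≤ i.toNat ∧ pvLand orig N.toNat (i.toNat, j.toNat) ∧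
              pvLand orig N.toNat (i.toNat - 1, j.toNat)) ∧
             ((u' = (i.toNat - 1, j.toNat) ∧ v' = (i.toNat, j.toNat)) ∨
              (u' = (i.toNat, j.toNat) ∧ v' = (i.toNat - 1, j.toNat))))) ∨
               ((1 ≤ j.toNat ∧ pvLand orig N.toNat (i.toNat, j.toNat) ∧
                 pvLand orig N.toNat (i.toNat, j.toNat - 1)) ∧
                ((u' = (i.toNat, j.toNat - 1) ∧ v' = (i.toNat, j.toNat)) ∨
                 (u' = (i.toNat, j.toNat) ∧ v' = (i.toNat, j.toNat - 1)))))) ↔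
              (((pvEGen orig N.toNat (pvRm N.toNat (i.toNat, j.toNat)) u' v' ∨
            ((1 ≤ i.toNat ∧ pvLand orig N.toNat (i.toNat, j.toNat) ∧
              pvLand orig N.toNat (i.toNat - 1, j.toNat)) ∧
             ((u' = (i.toNat - 1, j.toNat) ∧ v' = (i.toNat, j.toNat)) ∨
              (u' = (i.toNat, j.toNat) ∧ v' = (i.toNat - 1, j.toNat))))) ∨
               ((u' = (i.toNat, j.toNat - 1) ∧ v' = (i.toNat, j.toNat)) ∨
                (u' = (i.toNat, j.toNat) ∧ v' = (i.toNat, j.toNat - 1))))) := by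
            intro u' v'
            constructor
            · rintro (h | ⟨_, h⟩); exact Or.inl h; exact Or.inr h
            · rintro (h | h); exact Or.inl h; exact Or.inr ⟨hE, h⟩
          rw [pvRTG_congr hgen u v, pvRTG_join]
          exact pvJoin_congr hR1iff _ _ u v
      · have hnE : ¬(1 ≤ j.toNat ∧ pvLand orig N.toNat (i.toNat, j.toNat) ∧
            pvLand orig N.toNat (i.toNat, j.toNat - 1)) := by
          rintro ⟨h1, _, hdl⟩
          apply hcond
          refine ⟨hi, by omega, ?_⟩
          rw [show (j - 1).toNat = j.toNat - 1 by omega]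
          exact hdl.2.2
        refine ⟨p1, R1, by simp only [if_neg hcond], hR1eq, hp1len, hp1ok, hp1agree, ?_⟩
        intro u v
        rw [← hR1iff u v]
        apply pvRTG_congr
        intro u' v'
        constructor
        · rintro (h | ⟨hE', _⟩); exact h; exact absurd hE' hnE
        · intro h; exact Or.inl h
    obtain ⟨p2, R2, hp2, hR2eq, hp2len, hp2ok, hp2agree, hR2iff⟩ := step2
    have hresult : pvUnite N orig parent i j = p2 := by rw [hstep, ← hp1, ← hp2]
    rw [hresult]
    refine ⟨hp2len, hp2ok, ?_⟩
    intro c hc1 hc2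
    rw [hp2agree c hc1 hc2]
    apply pvMinOf_congr_at
    intro d
    rw [← hR2iff c d]
    apply pvRTG_congr
    intro u' v'
    rw [hsucc u' v']
    constructor
    · exact fun h => h.elim
        (fun h12 => h12.elim (fun h1 => Or.inl h1) (fun h2 => Or.inr (Or.inl h2)))
        (fun h3 => Or.inr (Or.inr h3))
    · exact fun h => h.elim (fun h1 => Or.inl (Or.inl h1))
        (fun h23 => h23.elim (fun h2 => Or.inl (Or.inr h2)) (fun h3 => Or.inr h3))
  · -- not land: no edges are added and the parent array is untouched
    have hcell : ¬ pvGetCell orig i.toNat j.toNat = 1 := by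
      intro h
      exact hland ⟨hc01, hc02, h⟩
    have hstep : pvUnite N orig parent i j = parent := by
      unfold pvUnite
      rw [if_neg hcell]
    rw [hstep]
    refine ⟨hlen, hok, ?_⟩
    intro c hc1 hc2
    rw [hagree c hc1 hc2]
    apply pvMinOf_congr_at
    intro d
    apply pvRTG_congr
    intro u' v'
    rw [hsucc u' v']
    constructor
    · exact fun h => Or.inl h
    · exact fun h => h.elim id (fun hxy => hxy.elim
        (fun hx => absurd hx.1.2.1 hland) (fun hy => absurd hy.1.2.1 hland))

theorem pvPass1_row (orig : List (List Int)) (N : Int) (i : Int) (hi : 0 ≤ i) (hiN : i < N) :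
    ∀ (k : Nat) (j0 : Int), 0 ≤ j0 → j0 ≤ N → k = (N - j0).toNat →
    ∀ parent : List Int, parent.length = N.toNat * N.toNat → pvParentOk parent →
    (∀ c : Nat × Nat, c.1 < N.toNat → c.2 < N.toNat →
      pvUfRoot parent (pvRm N.toNat c) =
        pvMinOf N.toNat (pvEConn orig N.toNat (i.toNat * N.toNat + j0.toNat)) c) →
    ((PySem.List.pyRange j0 N 1).foldl (fun par j => pvUnite N orig par i j) parent).length
        = N.toNat * N.toNat ∧
    pvParentOk ((PySem.List.pyRange j0 N 1).foldl (fun par j => pvUnite N orig par i j) parent) ∧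
    (∀ c : Nat × Nat, c.1 < N.toNat → c.2 < N.toNat →
      pvUfRoot ((PySem.List.pyRange j0 N 1).foldl (fun par j => pvUnite N orig par i j) parent)
          (pvRm N.toNat c) =
        pvMinOf N.toNat (pvEConn orig N.toNat (i.toNat * N.toNat + N.toNat)) c) := by
  intro k
  induction k with
  | zero =>
    intro j0 h0 hN hk parent hlen hok hagree
    rw [PySem.List.pyRange_one_eq_nil (by omega : N ≤ j0), List.foldl_nil]
    rw [show i.toNat * N.toNat + j0.toNat = i.toNat * N.toNat + N.toNat by omega] at hagree
    exact ⟨hlen, hok, hagree⟩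
  | succ k ih =>
    intro j0 h0 hN hk parent hlen hok hagree
    have hj0N : j0 < N := by omega
    rw [PySem.List.pyRange_one_cons hj0N, List.foldl_cons]
    have hstep := pvUnite_correct orig N i j0 hi hiN h0 hj0N parent hlen hok
      (by
        intro c hc1 hc2
        rw [hagree c hc1 hc2]
        rfl)
    apply ih (j0 + 1) (by omega) (by omega) (by omega) _ hstep.1 hstep.2.1
    intro c hc1 hc2
    rw [hstep.2.2 c hc1 hc2]
    have : pvRm N.toNat (i.toNat, j0.toNat) + 1 = i.toNat * N.toNat + (j0 + 1).toNat := by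
      unfold pvRm; simp; omega
    rw [this]

theorem pvPass1_grid (orig : List (List Int)) (N : Int) :
    ∀ (k : Nat) (i0 : Int), 0 ≤ i0 → i0 ≤ N → k = (N - i0).toNat →
    ∀ parent : List Int, parent.length = N.toNat * N.toNat → pvParentOk parent →
    (∀ c : Nat × Nat, c.1 < N.toNat → c.2 < N.toNat →
      pvUfRoot parent (pvRm N.toNat c) =
        pvMinOf N.toNat (pvEConn orig N.toNat (i0.toNat * N.toNat)) c) →
    ((PySem.List.pyRange i0 N 1).foldl
        (fun par i => (PySem.List.pyRange 0 N 1).foldl (fun par' j => pvUnite N orig par' i j) par)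
        parent).length = N.toNat * N.toNat ∧
    pvParentOk ((PySem.List.pyRange i0 N 1).foldl
        (fun par i => (PySem.List.pyRange 0 N 1).foldl (fun par' j => pvUnite N orig par' i j) par)
        parent) ∧
    (∀ c : Nat × Nat, c.1 < N.toNat → c.2 < N.toNat →
      pvUfRoot ((PySem.List.pyRange i0 N 1).foldl
          (fun par i => (PySem.List.pyRange 0 N 1).foldl (fun par' j => pvUnite N orig par' i j) par)
          parent) (pvRm N.toNat c) =
        pvMinOf N.toNat (pvEConn orig N.toNat (N.toNat * N.toNat)) c) := by
  intro k
  induction k with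
  | zero =>
    intro i0 h0 hN hk parent hlen hok hagree
    rw [PySem.List.pyRange_one_eq_nil (by omega : N ≤ i0), List.foldl_nil]
    rw [show i0.toNat * N.toNat = N.toNat * N.toNat by
      have : i0.toNat = N.toNat := by omega
      rw [this]] at hagree
    exact ⟨hlen, hok, hagree⟩
  | succ k ih =>
    intro i0 h0 hN hk parent hlen hok hagree
    have hi0N : i0 < N := by omega
    rw [PySem.List.pyRange_one_cons hi0N, List.foldl_cons]
    have hrow := pvPass1_row orig N i0 h0 hi0N N.toNat 0 (le_refl 0) (by omega) (by omega)
      parent hlen hok (by simpa using hagree)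
    apply ih (i0 + 1) (by omega) (by omega) (by omega) _ hrow.1 hrow.2.1
    intro c hc1 hc2
    rw [hrow.2.2 c hc1 hc2]
    have : i0.toNat * N.toNat + N.toNat = (i0 + 1).toNat * N.toNat := by
      have : (i0 + 1).toNat = i0.toNat + 1 := by omega
      rw [this]; ring
    rw [this]

theorem pvRTG_false (x y : Nat × Nat)
    (h : Relation.ReflTransGen (fun _ _ : Nat × Nat => False) x y) : x = y := by
  induction h with
  | refl => rfl
  | tail _ hstep _ => exact absurd hstep id

theorem pvEConn_zero (orig : List (List Int)) (n : Nat) (x y : Nat × Nat) :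
    pvEConn orig n 0 x y ↔ x = y := by
  constructor
  · intro h
    apply pvRTG_false
    apply Relation.ReflTransGen.mono _ h
    rintro u v (⟨_, _, h0, _⟩ | ⟨_, _, h0, _⟩) <;> omega
  · rintro rfl; exact Relation.ReflTransGen.refl

theorem pvParent0_agree (orig : List (List Int)) (n : Nat)
    (parent : List Int) (hlen : parent.length = n * n)
    (hfix : ∀ k, k < n * n → parent.getD k (Int.ofNat k) = Int.ofNat k) :
    ∀ c : Nat × Nat, c.1 < n → c.2 < n →
      pvUfRoot parent (pvRm n c) = pvMinOf n (pvEConn orig n 0) c := by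
  intro c hc1 hc2
  have hrm : pvRm n c < n * n := pvRm_lt hc1 hc2
  rw [pvUfRoot_fix parent _ (hfix _ hrm)]
  apply le_antisymm
  · obtain ⟨d, hd, hd1, hd2, hdrm⟩ := pvMinOf_spec
      (R := pvEConn orig n 0) (fun x => Relation.ReflTransGen.refl) hc1 hc2
    have : c = d := (pvEConn_zero orig n c d).mp hd
    rw [← hdrm, ← this]
  · exact pvMinOf_le (n := n) (Relation.ReflTransGen.refl) hc1 hc2

-- after the whole pass 1, the union-find relation is exactly 4-adjacency connectivity
theorem pvEConn_final (orig : List (List Int)) (n : Nat) {c : Nat × Nat}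
    (hc : pvLand orig n c) :
    pvMinOf n (pvEConn orig n (n * n)) c = pvRootRm orig n c := by
  unfold pvMinOf pvRootRm
  congr 1
  ext k
  constructor
  · rintro ⟨d, hd, hd1, hd2, rfl⟩
    have hconn : pvConn orig n c d := by
      apply Relation.ReflTransGen.mono _ hd
      rintro u v (⟨hu, hv, _, hsh | hsh⟩ | ⟨hv, hu, _, hsh | hsh⟩)
      · exact ⟨hu, hv, Or.inr ⟨hsh.2.symm, Or.inl hsh.1.symm⟩⟩
      · exact ⟨hu, hv, Or.inl ⟨hsh.1.symm, Or.inl hsh.2.symm⟩⟩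
      · exact ⟨hu, hv, Or.inr ⟨hsh.2, Or.inr hsh.1.symm⟩⟩
      · exact ⟨hu, hv, Or.inl ⟨hsh.1, Or.inr hsh.2.symm⟩⟩
    exact ⟨d, pvConn_land hc hconn, hconn, rfl⟩
  · rintro ⟨d, hdl, hconn, rfl⟩
    have hd : pvEConn orig n (n * n) c d := by
      apply Relation.ReflTransGen.mono _ hconn
      rintro u v ⟨hu, hv, ⟨he, hsh | hsh⟩ | ⟨he, hsh | hsh⟩⟩
      · exact Or.inl ⟨hu, hv, pvRm_lt hu.1 hu.2.1, Or.inr ⟨he.symm, hsh.symm⟩⟩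
      · exact Or.inr ⟨hv, hu, pvRm_lt hv.1 hv.2.1, Or.inr ⟨he, hsh.symm⟩⟩
      · exact Or.inl ⟨hu, hv, pvRm_lt hu.1 hu.2.1, Or.inl ⟨hsh.symm, he.symm⟩⟩
      · exact Or.inr ⟨hv, hu, pvRm_lt hv.1 hv.2.1, Or.inl ⟨hsh.symm, he⟩⟩
    exact ⟨d, hd, hdl.1, hdl.2.1, rfl⟩

-- ============ B-side: pass 2, handing out labels ============
structure PvLabInv (orig : List (List Int)) (n t : Nat)
    (st : List (List Int) × PySem.Dict Int Int × Int) : Prop where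
  mlen : st.1.length = orig.length
  mrow : ∀ a, (st.1.getD a []).length = (orig.getD a []).length
  mLab : ∀ c : Nat × Nat, pvLand orig n c → pvRm n c < t →
    pvGetCell st.1 c.1 c.2 = pvLabel orig n c
  mBg : ∀ a b, ¬(pvLand orig n (a, b) ∧ pvRm n (a, b) < t) →
    pvGetCell st.1 a b = pvGetCell orig a b
  labs : ∀ r : Nat × Nat, pvIsRoot orig n r → pvRm n r < t →
    st.2.1.get? (Int.ofNat (pvRm n r)) = some (pvLabel orig n r)
  labNone : ∀ k : Int, (∀ r : Nat × Nat, pvIsRoot orig n r → pvRm n r < t →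
    k ≠ Int.ofNat (pvRm n r)) → st.2.1.get? k = none
  idv : st.2.2 = 2 + ((pvRootsBelow orig n t).ncard : Int)

theorem pvLabel_root (orig : List (List Int)) (n : Nat) {c : Nat × Nat}
    (hc : pvLand orig n c) :
    pvLabel orig n (pvRoot orig n c) = pvLabel orig n c := by
  unfold pvLabel
  rw [← pvRootRm_congr (pvRoot_spec hc).2.1]

theorem pvLabelCell_correct (orig : List (List Int)) (N : Int)
    (holen : N.toNat ≤ orig.length)
    (horow : ∀ a, a < N.toNat → N.toNat ≤ (orig.getD a []).length)
    (parent : List Int)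
    (hroot : ∀ c : Nat × Nat, pvLand orig N.toNat c →
      pvUfRoot parent (pvRm N.toNat c) = pvRootRm orig N.toNat c)
    (i j : Int) (hi : 0 ≤ i) (hiN : i < N) (hj : 0 ≤ j) (hjN : j < N)
    (st : List (List Int) × PySem.Dict Int Int × Int)
    (inv : PvLabInv orig N.toNat (pvRm N.toNat (i.toNat, j.toNat)) st) :
    PvLabInv orig N.toNat (pvRm N.toNat (i.toNat, j.toNat) + 1) (pvLabelCell N parent st i j) := by
  have hc1 : i.toNat < N.toNat := by omega
  have hc2 : j.toNat < N.toNat := by omega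
  by_cases hland : pvLand orig N.toNat (i.toNat, j.toNat)
  · -- a land cell: it is relabelled with its component's label
    have hcell : pvGetCell st.1 i.toNat j.toNat = 1 := by
      rw [inv.mBg i.toNat j.toNat (by rintro ⟨_, h2⟩; omega)]
      exact hland.2.2
    have hidx : i.toNat * N.toNat + j.toNat = pvRm N.toNat (i.toNat, j.toNat) := rfl
    have hfind : pvUfRoot parent (i.toNat * N.toNat + j.toNat) =
        pvRootRm orig N.toNat (i.toNat, j.toNat) := by
      rw [hidx, hroot _ hland]
    have hρ := pvRoot_spec hland
    have hρroot := pvIsRoot_root hland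
    have hρle : pvRootRm orig N.toNat (i.toNat, j.toNat) ≤ pvRm N.toNat (i.toNat, j.toNat) :=
      pvRootRm_le hland Relation.ReflTransGen.refl
    have hmin : i.toNat < st.1.length := by rw [inv.mlen]; omega
    have hmrow : j.toNat < (st.1.getD i.toNat []).length := by
      rw [inv.mrow]; have := horow _ hc1; omega
    have hstep : pvLabelCell N parent st i j =
        (pvSetCell st.1 i.toNat j.toNat
          ((if (st.2.1.get? (Int.ofNat (pvUfRoot parent (i.toNat * N.toNat + j.toNat)))).isNone
            then (st.2.1.insert (Int.ofNat (pvUfRoot parent (i.toNat * N.toNat + j.toNat))) st.2.2,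
                  st.2.2 + 1)
            else (st.2.1, st.2.2)).1.getD
              (Int.ofNat (pvUfRoot parent (i.toNat * N.toNat + j.toNat))) 0),
         (if (st.2.1.get? (Int.ofNat (pvUfRoot parent (i.toNat * N.toNat + j.toNat)))).isNone
            then (st.2.1.insert (Int.ofNat (pvUfRoot parent (i.toNat * N.toNat + j.toNat))) st.2.2,
                  st.2.2 + 1)
            else (st.2.1, st.2.2)).1,
         (if (st.2.1.get? (Int.ofNat (pvUfRoot parent (i.toNat * N.toNat + j.toNat)))).isNone
            then (st.2.1.insert (Int.ofNat (pvUfRoot parent (i.toNat * N.toNat + j.toNat))) st.2.2,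
                  st.2.2 + 1)
            else (st.2.1, st.2.2)).2) := by
      unfold pvLabelCell
      rw [if_pos hcell]
    rcases Nat.lt_or_ge (pvRootRm orig N.toNat (i.toNat, j.toNat))
        (pvRm N.toNat (i.toNat, j.toNat)) with hlt | hge
    · -- the root was seen before: its label is already in the dict
      have hgets : st.2.1.get? (Int.ofNat (pvRootRm orig N.toNat (i.toNat, j.toNat))) =
          some (pvLabel orig N.toNat (pvRoot orig N.toNat (i.toNat, j.toNat))) := by
        have := inv.labs (pvRoot orig N.toNat (i.toNat, j.toNat)) hρroot (by rw [hρ.2.2]; omega)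
        rwa [hρ.2.2] at this
      rw [hstep, hfind]
      have hnone : (st.2.1.get? (Int.ofNat (pvRootRm orig N.toNat (i.toNat, j.toNat)))).isNone
          = false := by rw [hgets]; rfl
      rw [hnone]
      simp only [Bool.false_eq_true, if_false]
      have hval : st.2.1.getD (Int.ofNat (pvRootRm orig N.toNat (i.toNat, j.toNat))) 0 =
          pvLabel orig N.toNat (i.toNat, j.toNat) := by
        rw [PySem.Dict.getD_eq_get?_getD, hgets, Option.getD_some, pvLabel_root orig N.toNat hland]
      rw [hval]
      have hnoroot : ∀ r : Nat × Nat, pvIsRoot orig N.toNat r →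
          pvRm N.toNat r ≠ pvRm N.toNat (i.toNat, j.toNat) := by
        intro r hr hrm
        have hrc : r = (i.toNat, j.toNat) := pvRm_inj hr.1.2.1 hc2 hrm
        have hrr : pvRootRm orig N.toNat r = pvRm N.toNat r := by
          conv_rhs => rw [← hr.2]
          rw [(pvRoot_spec hr.1).2.2]
        rw [hrc] at hrr
        omega
      refine ⟨?_, ?_, ?_, ?_, ?_, ?_, ?_⟩
      · simp [(pvShape_setCell st.1 _ _ _).1, inv.mlen]
      · intro a; rw [(pvShape_setCell st.1 _ _ _).2 a]; exact inv.mrow a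
      · intro c hcl hclt
        by_cases hcc : c = (i.toNat, j.toNat)
        · subst hcc
          rw [pvGetCell_setCell_self st.1 _ _ _ hmin hmrow]
        · have hne : ¬(i.toNat = c.1 ∧ j.toNat = c.2) := by
            rintro ⟨h1, h2⟩; exact hcc (by apply Prod.ext <;> simp [← h1, ← h2])
          rw [pvGetCell_setCell_ne st.1 _ _ _ _ _ hne]
          apply inv.mLab c hcl
          have : pvRm N.toNat c ≠ pvRm N.toNat (i.toNat, j.toNat) := by
            intro h; exact hcc (pvRm_inj hcl.2.1 hc2 h)
          omega
      · intro a b hcond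
        have hne : ¬(i.toNat = a ∧ j.toNat = b) := by
          rintro ⟨rfl, rfl⟩; exact hcond ⟨hland, by omega⟩
        rw [pvGetCell_setCell_ne st.1 _ _ _ _ _ hne]
        apply inv.mBg
        rintro ⟨h1, h2⟩; exact hcond ⟨h1, by omega⟩
      · intro r hr hrt
        apply inv.labs r hr
        have := hnoroot r hr
        omega
      · intro k hk
        apply inv.labNone
        intro r hr hrt
        apply hk r hr
        omega
      · simp only
        rw [inv.idv, pvRootsBelow_succ_of_no_root orig N.toNat _ hnoroot]
    · -- this cell is its component's root: a fresh label is handed out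
      have hrmeq : pvRootRm orig N.toNat (i.toNat, j.toNat) = pvRm N.toNat (i.toNat, j.toNat) :=
        by omega
      have hroot0 : pvIsRoot orig N.toNat (i.toNat, j.toNat) := by
        refine ⟨hland, ?_⟩
        exact pvRm_inj hρ.1.2.1 hc2 (by rw [hρ.2.2, hrmeq])
      have hgets : st.2.1.get? (Int.ofNat (pvRootRm orig N.toNat (i.toNat, j.toNat))) = none := by
        apply inv.labNone
        intro r hr hrt
        rw [hrmeq]
        intro h
        have := Int.ofNat_inj.mp h
        omega
      rw [hstep, hfind]
      have hnone : (st.2.1.get? (Int.ofNat (pvRootRm orig N.toNat (i.toNat, j.toNat)))).isNone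
          = true := by rw [hgets]; rfl
      rw [hnone]
      simp only [if_true]
      have hval : (st.2.1.insert (Int.ofNat (pvRootRm orig N.toNat (i.toNat, j.toNat)))
          st.2.2).getD (Int.ofNat (pvRootRm orig N.toNat (i.toNat, j.toNat))) 0 =
          pvLabel orig N.toNat (i.toNat, j.toNat) := by
        rw [PySem.Dict.getD_insert, if_pos rfl, inv.idv]
        unfold pvLabel
        rw [hrmeq]
      rw [hval]
      have hins : pvRootsBelow orig N.toNat (pvRm N.toNat (i.toNat, j.toNat) + 1) =
          insert (i.toNat, j.toNat) (pvRootsBelow orig N.toNat (pvRm N.toNat (i.toNat, j.toNat))) := by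
        ext c
        simp only [pvRootsBelow, Set.mem_setOf_eq, Set.mem_insert_iff]
        constructor
        · rintro ⟨hr, hltr⟩
          rcases Nat.lt_succ_iff_lt_or_eq.mp hltr with h | h
          · exact Or.inr ⟨hr, h⟩
          · exact Or.inl (pvRm_inj hr.1.2.1 hc2 h)
        · rintro (rfl | ⟨hr, hltr⟩)
          · exact ⟨hroot0, by omega⟩
          · exact ⟨hr, by omega⟩
      refine ⟨?_, ?_, ?_, ?_, ?_, ?_, ?_⟩
      · simp [(pvShape_setCell st.1 _ _ _).1, inv.mlen]
      · intro a; rw [(pvShape_setCell st.1 _ _ _).2 a]; exact inv.mrow a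
      · intro c hcl hclt
        by_cases hcc : c = (i.toNat, j.toNat)
        · subst hcc
          rw [pvGetCell_setCell_self st.1 _ _ _ hmin hmrow]
        · have hne : ¬(i.toNat = c.1 ∧ j.toNat = c.2) := by
            rintro ⟨h1, h2⟩; exact hcc (by apply Prod.ext <;> simp [← h1, ← h2])
          rw [pvGetCell_setCell_ne st.1 _ _ _ _ _ hne]
          apply inv.mLab c hcl
          have : pvRm N.toNat c ≠ pvRm N.toNat (i.toNat, j.toNat) := by
            intro h; exact hcc (pvRm_inj hcl.2.1 hc2 h)
          omega
      · intro a b hcond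
        have hne : ¬(i.toNat = a ∧ j.toNat = b) := by
          rintro ⟨rfl, rfl⟩; exact hcond ⟨hland, by omega⟩
        rw [pvGetCell_setCell_ne st.1 _ _ _ _ _ hne]
        apply inv.mBg
        rintro ⟨h1, h2⟩; exact hcond ⟨h1, by omega⟩
      · intro r hr hrt
        simp only
        rw [PySem.Dict.get?_insert]
        rcases Nat.lt_succ_iff_lt_or_eq.mp hrt with h | h
        · rw [if_neg, inv.labs r hr h]
          intro hkey
          have := Int.ofNat_inj.mp hkey
          omega
        · have hrc : r = (i.toNat, j.toNat) := pvRm_inj hr.1.2.1 hc2 h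
          subst hrc
          rw [if_pos (by rw [hrmeq]), inv.idv]
          unfold pvLabel
          rw [hrmeq, h]
      · intro k hk
        simp only
        rw [PySem.Dict.get?_insert, if_neg, inv.labNone]
        · intro r hr hrt
          apply hk r hr
          omega
        · rw [hrmeq]
          exact hk (i.toNat, j.toNat) hroot0 (by omega)
      · simp only
        rw [inv.idv, hins, Set.ncard_insert_of_notMem (by rintro ⟨_, h⟩; omega)
          (pvRootsBelow_finite orig N.toNat _)]
        push_cast
        ring
  · -- not land: untouched
    have hcell : ¬ pvGetCell st.1 i.toNat j.toNat = 1 := by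
      rw [inv.mBg i.toNat j.toNat (by rintro ⟨h1, _⟩; exact hland h1)]
      intro h
      exact hland ⟨hc1, hc2, h⟩
    have hstep : pvLabelCell N parent st i j = st := by
      unfold pvLabelCell
      rw [if_neg hcell]
    rw [hstep]
    have hnoroot : ∀ r : Nat × Nat, pvIsRoot orig N.toNat r →
        pvRm N.toNat r ≠ pvRm N.toNat (i.toNat, j.toNat) := by
      intro r hr hrm
      have : r = (i.toNat, j.toNat) := pvRm_inj hr.1.2.1 hc2 hrm
      exact hland (this ▸ hr.1)
    refine ⟨inv.mlen, inv.mrow, ?_, ?_, ?_, ?_, ?_⟩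
    · intro c hcl hclt
      apply inv.mLab c hcl
      have : pvRm N.toNat c ≠ pvRm N.toNat (i.toNat, j.toNat) := by
        intro h
        exact hland ((pvRm_inj hcl.2.1 hc2 h) ▸ hcl)
      omega
    · intro a b hcond
      apply inv.mBg
      rintro ⟨h1, h2⟩; exact hcond ⟨h1, by omega⟩
    · intro r hr hrt
      apply inv.labs r hr
      have := hnoroot r hr
      omega
    · intro k hk
      apply inv.labNone
      intro r hr hrt
      apply hk r hr
      omega
    · rw [inv.idv, pvRootsBelow_succ_of_no_root orig N.toNat _ hnoroot]

theorem pvPass2_row (orig : List (List Int)) (N : Int)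
    (holen : N.toNat ≤ orig.length)
    (horow : ∀ a, a < N.toNat → N.toNat ≤ (orig.getD a []).length)
    (parent : List Int)
    (hroot : ∀ c : Nat × Nat, pvLand orig N.toNat c →
      pvUfRoot parent (pvRm N.toNat c) = pvRootRm orig N.toNat c)
    (i : Int) (hi : 0 ≤ i) (hiN : i < N) :
    ∀ (k : Nat) (j0 : Int), 0 ≤ j0 → j0 ≤ N → k = (N - j0).toNat →
    ∀ st, PvLabInv orig N.toNat (i.toNat * N.toNat + j0.toNat) st →
    PvLabInv orig N.toNat (i.toNat * N.toNat + N.toNat)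
      ((PySem.List.pyRange j0 N 1).foldl (fun st' j => pvLabelCell N parent st' i j) st) := by
  intro k
  induction k with
  | zero =>
    intro j0 h0 hN hk st inv
    rw [PySem.List.pyRange_one_eq_nil (by omega : N ≤ j0), List.foldl_nil]
    have hj : j0.toNat = N.toNat := by omega
    rwa [hj] at inv
  | succ k ih =>
    intro j0 h0 hN hk st inv
    have hj0N : j0 < N := by omega
    rw [PySem.List.pyRange_one_cons hj0N, List.foldl_cons]
    have hstep := pvLabelCell_correct orig N holen horow parent hroot i j0 hi hiN h0 hj0N st
      (by simpa [pvRm] using inv)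
    apply ih (j0 + 1) (by omega) (by omega) (by omega)
    have h1 : (j0 + 1).toNat = j0.toNat + 1 := by omega
    rw [h1]
    simpa [pvRm] using hstep

theorem pvPass2_grid (orig : List (List Int)) (N : Int)
    (holen : N.toNat ≤ orig.length)
    (horow : ∀ a, a < N.toNat → N.toNat ≤ (orig.getD a []).length)
    (parent : List Int)
    (hroot : ∀ c : Nat × Nat, pvLand orig N.toNat c →
      pvUfRoot parent (pvRm N.toNat c) = pvRootRm orig N.toNat c) :
    ∀ (k : Nat) (i0 : Int), 0 ≤ i0 → i0 ≤ N → k = (N - i0).toNat →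
    ∀ st, PvLabInv orig N.toNat (i0.toNat * N.toNat) st →
    PvLabInv orig N.toNat (N.toNat * N.toNat)
      ((PySem.List.pyRange i0 N 1).foldl
        (fun st i => (PySem.List.pyRange 0 N 1).foldl (fun st' j => pvLabelCell N parent st' i j) st)
        st) := by
  intro k
  induction k with
  | zero =>
    intro i0 h0 hN hk st inv
    rw [PySem.List.pyRange_one_eq_nil (by omega : N ≤ i0), List.foldl_nil]
    have hi : i0.toNat * N.toNat = N.toNat * N.toNat := by
      have h2 : i0.toNat = N.toNat := by omega
      rw [h2]
    rwa [hi] at inv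
  | succ k ih =>
    intro i0 h0 hN hk st inv
    have hi0N : i0 < N := by omega
    rw [PySem.List.pyRange_one_cons hi0N, List.foldl_cons]
    have hrow := pvPass2_row orig N holen horow parent hroot i0 h0 hi0N N.toNat 0 (le_refl 0)
      (by omega) (by omega) st (by simpa using inv)
    apply ih (i0 + 1) (by omega) (by omega) (by omega)
    have h1 : (i0 + 1).toNat * N.toNat = i0.toNat * N.toNat + N.toNat := by
      have : (i0 + 1).toNat = i0.toNat + 1 := by omega
      rw [this]; ring
    rw [h1]
    exact hrow

theorem pvPass2_init (orig : List (List Int)) (n : Nat) :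
    PvLabInv orig n 0 (orig, PySem.Dict.empty, 2) := by
  refine ⟨rfl, fun a => rfl, ?_, fun a b _ => rfl, ?_, ?_, ?_⟩
  · intro c _ h; omega
  · intro r _ h; omega
  · intro k _; exact PySem.Dict.get?_empty k
  · have : pvRootsBelow orig n 0 = ∅ := by
      ext c; simp [pvRootsBelow]
    simp [this]

theorem label_islands_B_char (maps : List (List Int)) (N : Int)
    (hpre : Pre_label_islands maps N) :
    PvResult maps N.toNat (label_islands_alt maps N) := by
  by_cases hN : N ≤ 0
  · have hn0 : N.toNat = 0 := by omega
    have : label_islands_alt maps N = (maps, 1) := by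
      unfold label_islands_alt
      rw [PySem.List.pyRange_one_eq_nil (by omega : N ≤ 0)]
      rfl
    rw [this]
    refine ⟨rfl, fun a => rfl, ?_, fun a b _ => rfl, ?_⟩
    · rintro ⟨a, b⟩ ⟨h1, _, _⟩; omega
    · rw [hn0]; simp [pvEmpty_rootsBelow]
  · push_neg at hN
    have holen := pvPre_len maps N hpre
    have horow := pvPre_row maps N hpre
    set parent0 : List Int :=
      (if 0 < N then (List.range (N.toNat * N.toNat)).map Int.ofNat else []) with hp0
    have hp0pos : parent0 = (List.range (N.toNat * N.toNat)).map Int.ofNat := by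
      rw [hp0, if_pos hN]
    have hp0len : parent0.length = N.toNat * N.toNat := by rw [hp0pos]; simp
    have hp0fix : ∀ k, k < N.toNat * N.toNat →
        parent0.getD k (Int.ofNat k) = Int.ofNat k := by
      intro k hk
      rw [hp0pos]
      simp [List.getD_eq_getElem?_getD, List.getElem?_map, List.getElem?_range, hk]
    have hp0ok : pvParentOk parent0 := by
      intro k
      by_cases hk : k < N.toNat * N.toNat
      · exact ⟨k, hp0fix k hk, le_refl k⟩
      · refine ⟨k, ?_, le_refl k⟩
        rw [List.getD_eq_getElem?_getD, List.getElem?_eq_none]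
        · rfl
        · rw [hp0len]; omega
    set parentF := (PySem.List.pyRange 0 N 1).foldl
      (fun par i => (PySem.List.pyRange 0 N 1).foldl (fun par' j => pvUnite N maps par' i j) par)
      parent0 with hpF
    have hpass1 := pvPass1_grid maps N N.toNat 0 (le_refl 0) (by omega) (by omega)
      parent0 hp0len hp0ok
      (by simpa using pvParent0_agree maps N.toNat parent0 hp0len hp0fix)
    have hroot : ∀ c : Nat × Nat, pvLand maps N.toNat c →
        pvUfRoot parentF (pvRm N.toNat c) = pvRootRm maps N.toNat c := by
      intro c hc
      rw [hpF]
      rw [hpass1.2.2 c hc.1 hc.2.1]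
      exact pvEConn_final maps N.toNat hc
    have hpass2 := pvPass2_grid maps N holen horow parentF hroot N.toNat 0 (le_refl 0)
      (by omega) (by omega) (maps, PySem.Dict.empty, 2)
      (by simpa using pvPass2_init maps N.toNat)
    set stF := (PySem.List.pyRange 0 N 1).foldl
      (fun st i => (PySem.List.pyRange 0 N 1).foldl (fun st' j => pvLabelCell N parentF st' i j) st)
      (maps, PySem.Dict.empty, 2) with hstF
    have hout : label_islands_alt maps N = (stF.1, stF.2.2 - 1) := by
      rw [hstF, hpF, hp0]
      rfl
    rw [hout]
    refine ⟨hpass2.mlen, hpass2.mrow, ?_, ?_, ?_⟩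
    · intro c hc
      apply hpass2.mLab c hc
      exact pvRm_lt hc.1 hc.2.1
    · intro a b hnl
      exact hpass2.mBg a b (fun h => hnl h.1)
    · simp only
      rw [hpass2.idv]
      ring

theorem pvResult_unique (orig : List (List Int)) (n : Nat) (o1 o2 : List (List Int) × Int)
    (h1 : PvResult orig n o1) (h2 : PvResult orig n o2) : o1 = o2 := by
  apply Prod.ext
  · apply pvEq_of_getCell
    · rw [h1.mlen, h2.mlen]
    · intro a; rw [h1.mrow a, h2.mrow a]
    · intro a b
      by_cases hl : pvLand orig n (a, b)
      · have e1 := h1.mLab (a, b) hl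
        have e2 := h2.mLab (a, b) hl
        simp only at e1 e2
        rw [e1, e2]
      · rw [h1.mBg a b hl, h2.mBg a b hl]
  · rw [h1.cnt, h2.cnt]

-- ===== VERDICT (by name: the statement is the Claim_ definition above) =====
theorem label_islands_spec : Claim_equal_label_islands := by
  intro maps N _ hpre
  unfold Spec_label_islands
  exact pvResult_unique maps N.toNat _ _ (label_islands_A_char maps N hpre)
    (label_islands_B_char maps N hpre)
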